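-- pv_equiv track=rewrite | github.com/odormond/adventofcode | 2023/14/fourteen.py | part2
-- ===== SOURCE A (Python) =====
-- def parse(data):
--     rocks = [
--         (l, c, symbol)
--         for l, line in enumerate(data.splitlines())
--         for c, symbol in enumerate(line)
--         if symbol != '.'
--     ]
--     rounds = {(l, c) for l, c, s in rocks if s == 'O'}
--     cubes = {(l, c) for l, c, s in rocks if s == '#'}
--     return rounds, cubes
--
-- def roll_north(rounds, cubes, width, height):
--     rolled = set()
--     for c in range(width):
--         pos, pack = 0, 0
--         for l in range(height):
--             if (l, c) in rounds:
--                 pack += 1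
--             elif (l, c) in cubes:
--                 for i in range(pos, pos + pack):
--                     rolled.add((i, c))
--                 pos, pack = l + 1, 0
--         for i in range(pos, pos + pack):
--             rolled.add((i, c))
--     assert len(rounds) == len(rolled)
--     return rolled
--
-- def roll_west(rounds, cubes, width, height):
--     rolled = set()
--     for l in range(height):
--         pos, pack = 0, 0
--         for c in range(width):
--             if (l, c) in rounds:
--                 pack += 1
--             elif (l, c) in cubes:
--                 for i in range(pos, pos + pack):
--                     rolled.add((l, i))
--                 pos, pack = c + 1, 0
--         for i in range(pos, pos + pack):
--             rolled.add((l, i))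
--     assert len(rounds) == len(rolled)
--     return rolled
--
-- def roll_south(rounds, cubes, width, height):
--     rolled = set()
--     for c in range(width):
--         pos, pack = height - 1, 0
--         for l in range(height - 1, -1, -1):
--             if (l, c) in rounds:
--                 pack += 1
--             elif (l, c) in cubes:
--                 for i in range(pos, pos - pack, -1):
--                     rolled.add((i, c))
--                 pos, pack = l - 1, 0
--         for i in range(pos, pos - pack, -1):
--             rolled.add((i, c))
--     assert len(rounds) == len(rolled)
--     return rolled
--
-- def roll_east(rounds, cubes, width, height):
--     rolled = set()
--     for l in range(height):
--         pos, pack = width - 1, 0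
--         for c in range(width - 1, -1, -1):
--             if (l, c) in rounds:
--                 pack += 1
--             elif (l, c) in cubes:
--                 for i in range(pos, pos - pack, -1):
--                     rolled.add((l, i))
--                 pos, pack = c - 1, 0
--         for i in range(pos, pos - pack, -1):
--             rolled.add((l, i))
--     assert len(rounds) == len(rolled)
--     return rolled
--
-- def part2(data, count):
--     height = len(data.splitlines())
--     width = len(data.splitlines()[0])
--     rounds, cubes = parse(data)
--
--     seen = {}
--     for i in range(count):
--         rounds = roll_north(rounds, cubes, width, height)
--         rounds = roll_west(rounds, cubes, width, height)
--         rounds = roll_south(rounds, cubes, width, height)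
--         rounds = roll_east(rounds, cubes, width, height)
--         state = tuple(sorted(rounds))
--         if state not in seen:
--             seen[state] = sum(height - l for l, c in rounds)
--         else:
--             break
--
--     for offset, known in enumerate(seen):
--         if known == state:
--             break
--
--     cycle = len(seen) - offset
--     return list(seen.values())[offset + (count - offset) % cycle - 1]
-- ===== SOURCE B (Python) =====
-- def part2(data, count):
--     lines = data.splitlines()
--     height = len(lines)
--     width = len(lines[0])
--
--     def cell(line, c):
--         ch = line[c] if c < len(line) else '.'
--         return ch if ch == 'O' or ch == '#' else '.'
--
--     # the platform as a grid of rows over the first line's width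
--     grid = [''.join(cell(line, c) for c in range(width)) for line in lines]
--
--     def tilt(row):
--         # slide every 'O' toward the start of the row, recursively splitting at
--         # the first cube: stones pack at the front of each '#'-free segment
--         if '#' in row:
--             i = row.index('#')
--             return tilt(row[:i]) + '#' + tilt(row[i + 1:])
--         k = row.count('O')
--         return 'O' * k + '.' * (len(row) - k)
--
--     def spin(g):
--         cols = [tilt(''.join(row[c] for row in g)) for c in range(width)]                  # north
--         rows = [tilt(''.join(col[l] for col in cols)) for l in range(height)]              # west
--         cols = [tilt(''.join(row[c] for row in rows)[::-1])[::-1] for c in range(width)]   # south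
--         return [tilt(''.join(col[l] for col in cols)[::-1])[::-1] for l in range(height)]  # east
--
--     loads = []
--     index = {}
--     for _ in range(count):
--         grid = spin(grid)
--         key = tuple(grid)
--         if key in index:
--             break
--         index[key] = len(loads)
--         loads.append(sum((height - l) * row.count('O') for l, row in enumerate(grid)))
--
--     offset = index[tuple(grid)]
--     cycle = len(loads) - offset
--     return loads[offset + (count - offset) % cycle - 1]
-- ===== Notes on version B (the rewrite author's own statement) =====
-- stated objective: alternative
-- what changed: B re-represents the platform as a grid of row strings instead of A's two coordinate sets: each tilt recursively splits a lane at its first '#' and packs the segment's 'O's against the wall, the spin-cycle dict is keyed on the grid itself rather than the tuple of sorted stone coordinates, and loads are read off rows with str.count.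
import Mathlib
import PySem

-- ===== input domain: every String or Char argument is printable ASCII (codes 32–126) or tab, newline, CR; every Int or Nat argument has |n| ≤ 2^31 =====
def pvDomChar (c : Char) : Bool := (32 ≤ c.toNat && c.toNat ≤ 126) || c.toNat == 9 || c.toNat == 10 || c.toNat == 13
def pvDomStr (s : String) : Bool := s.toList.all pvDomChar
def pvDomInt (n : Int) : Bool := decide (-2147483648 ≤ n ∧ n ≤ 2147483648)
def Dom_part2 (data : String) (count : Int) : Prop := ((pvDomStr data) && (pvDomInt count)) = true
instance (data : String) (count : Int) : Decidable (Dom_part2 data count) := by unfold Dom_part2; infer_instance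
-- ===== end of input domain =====

-- B re-represents the platform as a grid of rows tilted by recursively splitting each lane at its
-- first '#' and packing the 'O's of every cube-free segment against the wall, keying the cycle
-- detection on the grid itself, instead of A's coordinate-set lane scans keyed on sorted stone
-- tuples; equality of the return value is proved on Pre_part2.


-- ===== PORT A =====
-- parse(data): rocks / rounds / cubes comprehensions
def parseA (data : String) : PySem.Set (Int × Int) × PySem.Set (Int × Int) :=
  let rocks : List (Int × Int × Char) :=
    (PySem.List.enumerate (PySem.Str.splitlines data)).flatMap (fun p =>
      ((PySem.List.enumerate p.2.toList).filter (fun q => q.2 != '.')).map (fun q => (p.1, q.1, q.2)))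
  (PySem.Set.ofList ((rocks.filter (fun r => r.2.2 == 'O')).map (fun r => (r.1, r.2.1))),
   PySem.Set.ofList ((rocks.filter (fun r => r.2.2 == '#')).map (fun r => (r.1, r.2.1))))

-- roll_north (the 'assert len(rounds) == len(rolled)' cannot raise in Lean; inputs where it
-- fires in Python — an 'O' beyond the first line's width — are excluded by Pre_part2)
def rollNorth (rounds cubes : PySem.Set (Int × Int)) (width height : Int) : PySem.Set (Int × Int) :=
  (PySem.List.pyRange 0 width 1).foldl (fun rolled c =>
    let st := (PySem.List.pyRange 0 height 1).foldl
      (fun (s : Int × Int × PySem.Set (Int × Int)) l =>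
        if (l, c) ∈ rounds then (s.1, s.2.1 + 1, s.2.2)
        else if (l, c) ∈ cubes then
          (l + 1, 0, (PySem.List.pyRange s.1 (s.1 + s.2.1) 1).foldl (fun r i => PySem.Set.add r (i, c)) s.2.2)
        else s)
      (0, 0, rolled)
    (PySem.List.pyRange st.1 (st.1 + st.2.1) 1).foldl (fun r i => PySem.Set.add r (i, c)) st.2.2)
    PySem.Set.empty

def rollWest (rounds cubes : PySem.Set (Int × Int)) (width height : Int) : PySem.Set (Int × Int) :=
  (PySem.List.pyRange 0 height 1).foldl (fun rolled l =>
    let st := (PySem.List.pyRange 0 width 1).foldl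
      (fun (s : Int × Int × PySem.Set (Int × Int)) c =>
        if (l, c) ∈ rounds then (s.1, s.2.1 + 1, s.2.2)
        else if (l, c) ∈ cubes then
          (c + 1, 0, (PySem.List.pyRange s.1 (s.1 + s.2.1) 1).foldl (fun r i => PySem.Set.add r (l, i)) s.2.2)
        else s)
      (0, 0, rolled)
    (PySem.List.pyRange st.1 (st.1 + st.2.1) 1).foldl (fun r i => PySem.Set.add r (l, i)) st.2.2)
    PySem.Set.empty

def rollSouth (rounds cubes : PySem.Set (Int × Int)) (width height : Int) : PySem.Set (Int × Int) :=
  (PySem.List.pyRange 0 width 1).foldl (fun rolled c =>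
    let st := (PySem.List.pyRange (height - 1) (-1) (-1)).foldl
      (fun (s : Int × Int × PySem.Set (Int × Int)) l =>
        if (l, c) ∈ rounds then (s.1, s.2.1 + 1, s.2.2)
        else if (l, c) ∈ cubes then
          (l - 1, 0, (PySem.List.pyRange s.1 (s.1 - s.2.1) (-1)).foldl (fun r i => PySem.Set.add r (i, c)) s.2.2)
        else s)
      (height - 1, 0, rolled)
    (PySem.List.pyRange st.1 (st.1 - st.2.1) (-1)).foldl (fun r i => PySem.Set.add r (i, c)) st.2.2)
    PySem.Set.empty

def rollEast (rounds cubes : PySem.Set (Int × Int)) (width height : Int) : PySem.Set (Int × Int) :=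
  (PySem.List.pyRange 0 height 1).foldl (fun rolled l =>
    let st := (PySem.List.pyRange (width - 1) (-1) (-1)).foldl
      (fun (s : Int × Int × PySem.Set (Int × Int)) c =>
        if (l, c) ∈ rounds then (s.1, s.2.1 + 1, s.2.2)
        else if (l, c) ∈ cubes then
          (c - 1, 0, (PySem.List.pyRange s.1 (s.1 - s.2.1) (-1)).foldl (fun r i => PySem.Set.add r (l, i)) s.2.2)
        else s)
      (width - 1, 0, rolled)
    (PySem.List.pyRange st.1 (st.1 - st.2.1) (-1)).foldl (fun r i => PySem.Set.add r (l, i)) st.2.2)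
    PySem.Set.empty

-- the 'for i in range(count)' loop with its break, on fuel count.toNat; carries (rounds, seen, state)
def loopA (cubes : PySem.Set (Int × Int)) (width height : Int) :
    Nat → PySem.Set (Int × Int) → PySem.Dict (List (Int × Int)) Int → List (Int × Int) →
    PySem.Dict (List (Int × Int)) Int × List (Int × Int)
  | 0, _rounds, seen, state => (seen, state)
  | fuel + 1, rounds, seen, _state =>
      let r1 := rollNorth rounds cubes width height
      let r2 := rollWest r1 cubes width height
      let r3 := rollSouth r2 cubes width height
      let r4 := rollEast r3 cubes width height
      let st := PySem.List.sorted2 r4 (fun p => p.1) (fun p => p.2) false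
      if (PySem.Dict.contains seen st) = true then (seen, st)
      else loopA cubes width height fuel r4
        (PySem.Dict.insert seen st ((r4.map (fun p => height - p.1)).sum)) st

-- 'for offset, known in enumerate(seen): if known == state: break' — when the loop falls through,
-- Python leaves offset at the last index (i - 1 here); on an empty seen (not reachable inside
-- Pre_part2) Python would raise NameError
def offsetScanA (state : List (Int × Int)) : Int → List (List (Int × Int)) → Int
  | i, [] => i - 1
  | i, k :: ks => if k == state then i else offsetScanA state (i + 1) ks

def part2 (data : String) (count : Int) : Int :=
  let lines := PySem.Str.splitlines data
  let height : Int := PySem.List.len lines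
  -- data.splitlines()[0] raises IndexError on input with no lines: outside Pre_part2
  let width : Int := PySem.Str.len ((PySem.List.pyGet? lines 0).getD "")
  let rc := parseA data
  let res := loopA rc.2 width height count.toNat rc.1 PySem.Dict.empty []
  let offset := offsetScanA res.2 0 (PySem.Dict.keys res.1)
  let cycle := PySem.Dict.size res.1 - offset
  -- '%' would raise ZeroDivisionError only when count < 1 (outside Pre_part2); the final index is
  -- always ≥ -1 and < len(seen), where Python's wrap-around indexing is exactly pyGetD
  PySem.List.pyGetD (PySem.Dict.values res.1) (offset + PySem.Int.mod (count - offset) cycle - 1) 0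

-- ===== PORT B =====
-- tilt(row): recursive split at the first cube; grid rows are ported on the char-list side
-- (''.join over single chars is the char list itself; row[:i] / row[i+1:] are PySem slices)
def tiltB (cs : List Char) : List Char :=
  if h : PySem.Chars.isIn ['#'] cs = true then
    -- i = row.index('#') = find (present, so no ValueError)
    tiltB (PySem.List.slice cs none (some (PySem.Chars.find cs ['#']))) ++
      '#' :: tiltB (PySem.List.slice cs (some (PySem.Chars.find cs ['#'] + 1)) none)
  else
    List.replicate (PySem.Chars.count cs ['O']) 'O' ++
      List.replicate (cs.length - PySem.Chars.count cs ['O']) '.'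
termination_by cs.length
decreasing_by
  · have hinf : ['#'] <:+: cs := (PySem.Chars.isIn_iff_infix _ _).mp h
    have h0 : (0:Int) ≤ PySem.Chars.find cs ['#'] := (PySem.Chars.find_nonneg_iff cs ['#']).mpr hinf
    have hsp := (PySem.Chars.find_spec (s := cs) (sub := ['#']) h0).1
    have hlt : (PySem.Chars.find cs ['#']).toNat < cs.length := by
      rcases hsp with ⟨t, ht⟩
      have := congrArg List.length ht
      simp [List.length_drop] at this
      omega
    rw [PySem.List.slice_to _ h0]
    simp [List.length_take]
    omega
  · have hinf : ['#'] <:+: cs := (PySem.Chars.isIn_iff_infix _ _).mp h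
    have h0 : (0:Int) ≤ PySem.Chars.find cs ['#'] := (PySem.Chars.find_nonneg_iff cs ['#']).mpr hinf
    have hsp := (PySem.Chars.find_spec (s := cs) (sub := ['#']) h0).1
    have hlt : (PySem.Chars.find cs ['#']).toNat < cs.length := by
      rcases hsp with ⟨t, ht⟩
      have := congrArg List.length ht
      simp [List.length_drop] at this
      omega
    rw [PySem.List.slice_from _ (by omega)]
    simp [List.length_drop]
    omega

-- cell(line, c): the guard makes line[c] safe; any symbol other than 'O'/'#' becomes '.'
def cellB (line : String) (c : Int) : Char :=
  let ch := if c < PySem.Str.len line then (PySem.Str.pyGet? line c).getD '.' else '.'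
  if ch == 'O' || ch == '#' then ch else '.'

-- [''.join(cell(line, c) for c in range(width)) for line in lines]
def gridInit (lines : List String) (width : Int) : List (List Char) :=
  lines.map (fun line => (PySem.List.pyRange 0 width 1).map (fun c => cellB line c))

-- ''.join(row[c] for row in g) — row[c] is in range by construction (rows have length width)
def colChars (g : List (List Char)) (c : Int) : List Char :=
  g.map (fun row => (PySem.List.pyGet? row c).getD '.')

-- ''.join(col[l] for col in cols)
def rowChars (cols : List (List Char)) (l : Int) : List Char :=
  cols.map (fun col => (PySem.List.pyGet? col l).getD '.')

-- spin(g): north, west, south, east; s[::-1] is List.reverse (PySem.List.slice?_none_none_neg_one)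
def spinB (width height : Int) (g : List (List Char)) : List (List Char) :=
  let cols := (PySem.List.pyRange 0 width 1).map (fun c => tiltB (colChars g c))
  let rows := (PySem.List.pyRange 0 height 1).map (fun l => tiltB (rowChars cols l))
  let cols2 := (PySem.List.pyRange 0 width 1).map (fun c => (tiltB ((colChars rows c).reverse)).reverse)
  (PySem.List.pyRange 0 height 1).map (fun l => (tiltB ((rowChars cols2 l).reverse)).reverse)

-- sum((height - l) * row.count('O') for l, row in enumerate(grid))
def loadB (height : Int) (g : List (List Char)) : Int :=
  ((PySem.List.enumerate g).map (fun p => (height - p.1) * (PySem.Chars.count p.2 ['O'] : Int))).sum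

-- the cycle loop on fuel count.toNat; carries (grid, index, loads)
def loopB (width height : Int) :
    Nat → List (List Char) → PySem.Dict (List (List Char)) Int → List Int →
    List (List Char) × PySem.Dict (List (List Char)) Int × List Int
  | 0, g, index, loads => (g, index, loads)
  | fuel + 1, g, index, loads =>
      let g' := spinB width height g
      if (PySem.Dict.contains index g') = true then (g', index, loads)
      else loopB width height fuel g'
        (PySem.Dict.insert index g' (PySem.List.len loads)) (loads ++ [loadB height g'])

def part2_alt (data : String) (count : Int) : Int :=
  let lines := PySem.Str.splitlines data
  let height : Int := PySem.List.len lines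
  -- lines[0] raises IndexError on input with no lines: outside Pre_part2
  let width : Int := PySem.Str.len ((PySem.List.pyGet? lines 0).getD "")
  let res := loopB width height count.toNat (gridInit lines width) PySem.Dict.empty []
  -- index[tuple(grid)] raises KeyError only when count < 1 (outside Pre_part2)
  let offset := (PySem.Dict.get? res.2.1 res.1).getD 0
  let cycle := PySem.List.len res.2.2 - offset
  PySem.List.pyGetD res.2.2 (offset + PySem.Int.mod (count - offset) cycle - 1) 0

-- ===== PRECONDITION & SPEC =====
-- Pre_part2 is exactly where the Python A returns: count ≥ 1 (else the loop never runs and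
-- 'state' is unbound, NameError), at least one line (else data.splitlines()[0] is IndexError),
-- and no 'O' beyond the first line's width (else 'assert len(rounds) == len(rolled)' fires)
def Pre_part2 (data : String) (count : Int) : Prop :=
  1 ≤ count ∧ PySem.Str.splitlines data ≠ [] ∧
  ∀ line ∈ PySem.Str.splitlines data,
    'O' ∉ line.toList.drop ((PySem.Str.splitlines data).headI.toList.length)
instance (data : String) (count : Int) : Decidable (Pre_part2 data count) := by
  unfold Pre_part2; infer_instance

def pvWitness_part2 : String × Int := ("O#\n.O", 3)

def Spec_part2 (data : String) (count : Int) (out : Int) : Prop := out = part2_alt data count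
instance (data : String) (count : Int) (out : Int) : Decidable (Spec_part2 data count out) := by
  unfold Spec_part2; infer_instance

-- ===== CLAIM (what is proved, stated in full; the proofs are below) =====
def Claim_equal_part2 : Prop := ∀ (data : String) (count : Int), Dom_part2 data count → Pre_part2 data count → Spec_part2 data count (part2 data count)

-- ===== LEMMAS AND PROOFS =====


-- ---------- proof-side helpers ----------

-- the character a grid cell shows for stone set R and cube set C
def cellM (R C : PySem.Set (Int × Int)) (p : Int × Int) : Char :=
  if p ∈ R then 'O' else if p ∈ C then '#' else '.'

-- the chars of one scan lane, indices a..b-1 through the coordinate transform g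
def laneOf (R C : PySem.Set (Int × Int)) (g : Int → Int × Int) (a b : Int) : List Char :=
  (PySem.List.pyRange a b 1).map (fun i => cellM R C (g i))

-- the grid B maintains, rendered from A's two coordinate sets
def gridOf (R C : PySem.Set (Int × Int)) (w h : Int) : List (List Char) :=
  (PySem.List.pyRange 0 h 1).map (fun l => (PySem.List.pyRange 0 w 1).map (fun c => cellM R C (l, c)))

-- invariant of A's stone sets: distinct, inside the grid, off the cubes
def GoodR (C : PySem.Set (Int × Int)) (w h : Int) (r : PySem.Set (Int × Int)) : Prop :=
  r.Nodup ∧ ∀ p ∈ r, 0 ≤ p.1 ∧ p.1 < h ∧ 0 ≤ p.2 ∧ p.2 < w ∧ p ∉ C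

-- where the stones of one lane settle: cells cs sit at indices a, a+1, …; pack stones are pending
-- for positions pos, pos+1, …
def settleChars : List Char → Int → Int → Int → List Int
  | [], _, pos, pack => PySem.List.pyRange pos (pos + pack) 1
  | ch :: cs, a, pos, pack =>
    if ch = 'O' then settleChars cs (a + 1) pos (pack + 1)
    else if ch = '#' then
      PySem.List.pyRange pos (pos + pack) 1 ++ settleChars cs (a + 1) (a + 1) 0
    else settleChars cs (a + 1) pos pack

-- ---------- chunk 1: single-char count / membership bridges ----------

theorem countGo_eq (c : Char) (l : List Char) : ∀ (fuel acc : Nat), l.length ≤ fuel →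
    PySem.Chars.count.go [c] fuel l acc = acc + l.count c := by
  induction l with
  | nil => intro fuel acc _; cases fuel <;> simp [PySem.Chars.count.go]
  | cons x t ih =>
    intro fuel acc hf
    cases fuel with
    | zero => simp at hf
    | succ f =>
      rw [PySem.Chars.count.go]
      by_cases hx : c = x
      · subst hx
        rw [if_pos (show [c].isPrefixOf (c :: t) = true by simp [List.isPrefixOf])]
        rw [show List.drop [c].length (c :: t) = t from rfl]
        rw [ih f (acc + 1) (by simpa using hf)]
        rw [List.count_cons]
        simp
        omega
      · rw [if_neg (show ¬ [c].isPrefixOf (x :: t) = true by simp [List.isPrefixOf]; omega)]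
        rw [ih f acc (by simpa using hf)]
        have hcnt : (x :: t).count c = t.count c := by
          rw [List.count_cons]
          simp [beq_iff_eq]
          intro h; exact absurd h.symm hx
        rw [hcnt]

theorem count_single (c : Char) (cs : List Char) : PySem.Chars.count cs [c] = cs.count c := by
  simp [PySem.Chars.count, countGo_eq c cs cs.length 0 le_rfl]

theorem singleton_infix_iff (c : Char) (cs : List Char) : [c] <:+: cs ↔ c ∈ cs := by
  constructor
  · intro h; exact h.mem (by simp)
  · intro h
    rcases List.append_of_mem h with ⟨s, t, rfl⟩
    exact ⟨s, t, by simp⟩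

theorem isIn_hash (cs : List Char) : PySem.Chars.isIn ['#'] cs = true ↔ '#' ∈ cs := by
  rw [PySem.Chars.isIn_iff_infix, singleton_infix_iff]

-- ---------- chunk 2: tiltB unfolding ----------

theorem find_seg (seg rest : List Char) (hs : '#' ∉ seg) :
    PySem.Chars.find (seg ++ '#' :: rest) ['#'] = (seg.length : Int) := by
  have hinf : ['#'] <:+: seg ++ '#' :: rest :=
    (singleton_infix_iff _ _).mpr (by simp)
  have h0 : (0:Int) ≤ PySem.Chars.find (seg ++ '#' :: rest) ['#'] :=
    (PySem.Chars.find_nonneg_iff _ _).mpr hinf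
  obtain ⟨hpre, hmin⟩ := PySem.Chars.find_spec (s := seg ++ '#' :: rest) (sub := ['#']) h0
  set i := PySem.Chars.find (seg ++ '#' :: rest) ['#'] with hi
  have hle : i.toNat ≤ seg.length := by
    by_contra hgt
    exact hmin seg.length (by omega) (by rw [List.drop_left]; exact ⟨rest, rfl⟩)
  have hge : ¬ i.toNat < seg.length := by
    intro hlt
    rcases hpre with ⟨t, ht⟩
    have : (seg ++ '#' :: rest)[i.toNat]? = some '#' := by
      have h00 : (List.drop i.toNat (seg ++ '#' :: rest))[0]? = some '#' := by
        rw [← ht]; rfl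
      rw [List.getElem?_drop] at h00
      simpa using h00
    rw [List.getElem?_append_left (by omega)] at this
    exact hs (List.mem_of_getElem? this)
  omega

theorem tiltB_noHash (cs : List Char) (h : '#' ∉ cs) :
    tiltB cs = List.replicate (cs.count 'O') 'O' ++ List.replicate (cs.length - cs.count 'O') '.' := by
  rw [tiltB]
  rw [dif_neg (by rw [isIn_hash]; simpa using h)]
  rw [count_single]

theorem tiltB_seg (seg rest : List Char) (hs : '#' ∉ seg) :
    tiltB (seg ++ '#' :: rest) = tiltB seg ++ '#' :: tiltB rest := by
  conv_lhs => rw [tiltB]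
  rw [dif_pos (by rw [isIn_hash]; simp)]
  rw [find_seg seg rest hs]
  have h1 : PySem.List.slice (seg ++ '#' :: rest) none (some ((seg.length : Int))) = seg := by
    rw [PySem.List.slice_to _ (by positivity)]; simp
  have h2 : PySem.List.slice (seg ++ '#' :: rest) (some ((seg.length : Int) + 1)) none = rest := by
    rw [PySem.List.slice_from _ (by positivity)]
    have h3 : ((seg.length : Int) + 1).toNat = (seg ++ ['#']).length := by simp
    rw [h3, show seg ++ '#' :: rest = (seg ++ ['#']) ++ rest by simp]
    exact List.drop_left
  rw [h1, h2]

theorem hash_decomp (cs : List Char) (h : '#' ∈ cs) :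
    ∃ seg rest, cs = seg ++ '#' :: rest ∧ '#' ∉ seg ∧ rest.length < cs.length := by
  have hsplit := List.takeWhile_append_dropWhile (p := fun c : Char => decide (c ≠ '#')) (l := cs)
  have hne : cs.dropWhile (fun c : Char => decide (c ≠ '#')) ≠ [] := by
    intro hnil
    rw [hnil, List.append_nil] at hsplit
    rw [← hsplit] at h
    have := List.mem_takeWhile_imp h
    simp at this
  have hnotin : '#' ∉ cs.takeWhile (fun c : Char => decide (c ≠ '#')) := by
    intro hmem; have := List.mem_takeWhile_imp hmem; simp at this
  cases hd : cs.dropWhile (fun c : Char => decide (c ≠ '#')) with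
  | nil => exact absurd hd hne
  | cons x t =>
    have hx : x = '#' := by
      have h1 := List.head_dropWhile_not (fun c : Char => decide (c ≠ '#')) hne
      have h2 := List.head?_eq_some_head (l := cs.dropWhile (fun c : Char => decide (c ≠ '#'))) hne
      have h3 : (cs.dropWhile (fun c : Char => decide (c ≠ '#'))).head? = some x := by
        rw [hd]; rfl
      rw [h2] at h3
      simp only [Option.some.injEq] at h3
      rw [h3] at h1
      simpa using h1
    refine ⟨cs.takeWhile (fun c : Char => decide (c ≠ '#')), t, ?_, hnotin, ?_⟩
    · calc cs = cs.takeWhile (fun c : Char => decide (c ≠ '#'))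
            ++ cs.dropWhile (fun c : Char => decide (c ≠ '#')) := hsplit.symm
        _ = _ := by rw [hd, hx]
    · have h2 : (cs.dropWhile (fun c : Char => decide (c ≠ '#'))).length ≤ cs.length :=
        List.length_dropWhile_le _ _
      rw [hd] at h2; simp at h2; omega

-- ---------- chunk 3: tiltB characterization ----------

theorem repOD_getElem (cO z k : Nat) :
    (List.replicate cO 'O' ++ List.replicate z '.')[k]? = some 'O' ↔ k < cO := by
  constructor
  · intro h
    by_contra hge
    rw [List.getElem?_append_right (by simp; omega)] at h
    rw [List.getElem?_replicate] at h
    split at h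
    · simp at h
    · simp at h
  · intro h
    rw [List.getElem?_append_left (by simpa using h)]
    simp [List.getElem?_replicate, h]

theorem tiltB_length (cs : List Char) : (tiltB cs).length = cs.length := by
  induction hn : cs.length using Nat.strong_induction_on generalizing cs with
  | _ n ih =>
    subst hn
    by_cases h : '#' ∈ cs
    · obtain ⟨seg, rest, rfl, hs, hlt⟩ := hash_decomp _ h
      rw [tiltB_seg seg rest hs, tiltB_noHash seg hs]
      have hr := ih rest.length hlt rest rfl
      have hc : seg.count 'O' ≤ seg.length := List.count_le_length
      simp [hr]
      omega
    · rw [tiltB_noHash cs h]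
      have hc : cs.count 'O' ≤ cs.length := List.count_le_length
      simp
      omega

theorem tiltB_chars (cs : List Char) : ∀ x ∈ tiltB cs, x = 'O' ∨ x = '#' ∨ x = '.' := by
  induction hn : cs.length using Nat.strong_induction_on generalizing cs with
  | _ n ih =>
    subst hn
    intro x hx
    by_cases h : '#' ∈ cs
    · obtain ⟨seg, rest, rfl, hs, hlt⟩ := hash_decomp _ h
      rw [tiltB_seg seg rest hs, tiltB_noHash seg hs] at hx
      rcases List.mem_append.mp hx with h1 | h1
      · rcases List.mem_append.mp h1 with h2 | h2
        · exact Or.inl (List.eq_of_mem_replicate h2)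
        · exact Or.inr (Or.inr (List.eq_of_mem_replicate h2))
      · rcases List.mem_cons.mp h1 with h2 | h2
        · exact Or.inr (Or.inl h2)
        · exact ih rest.length hlt rest rfl x h2
    · rw [tiltB_noHash cs h] at hx
      rcases List.mem_append.mp hx with h1 | h1
      · exact Or.inl (List.eq_of_mem_replicate h1)
      · exact Or.inr (Or.inr (List.eq_of_mem_replicate h1))

theorem tiltB_hash (cs : List Char) : ∀ (k : Nat), (tiltB cs)[k]? = some '#' ↔ cs[k]? = some '#' := by
  induction hn : cs.length using Nat.strong_induction_on generalizing cs with
  | _ n ih =>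
    subst hn
    intro k
    by_cases h : '#' ∈ cs
    · obtain ⟨seg, rest, rfl, hs, hlt⟩ := hash_decomp _ h
      rw [tiltB_seg seg rest hs]
      have hlen : (tiltB seg).length = seg.length := tiltB_length seg
      rcases Nat.lt_trichotomy k seg.length with hk | hk | hk
      · rw [List.getElem?_append_left (by omega), List.getElem?_append_left (by omega)]
        constructor
        · intro hcontr
          rw [tiltB_noHash seg hs] at hcontr
          rcases List.mem_append.mp (List.mem_of_getElem? hcontr) with h1 | h1
          · exact absurd (List.eq_of_mem_replicate h1) (by decide)
          · exact absurd (List.eq_of_mem_replicate h1) (by decide)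
        · intro hcontr
          exact absurd (List.mem_of_getElem? hcontr) hs
      · subst hk
        rw [List.getElem?_append_right (by omega), List.getElem?_append_right (by omega)]
        simp [hlen]
      · rw [List.getElem?_append_right (by omega), List.getElem?_append_right (by omega)]
        rw [hlen]
        have h1 : k - seg.length = (k - seg.length - 1) + 1 := by omega
        rw [h1]
        simp only [List.getElem?_cons_succ]
        exact ih rest.length hlt rest rfl _
    · rw [tiltB_noHash cs h]
      constructor
      · intro hcontr
        rcases List.mem_append.mp (List.mem_of_getElem? hcontr) with h1 | h1
        · exact absurd (List.eq_of_mem_replicate h1) (by decide)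
        · exact absurd (List.eq_of_mem_replicate h1) (by decide)
      · intro hcontr
        exact absurd (List.mem_of_getElem? hcontr) h

theorem settle_prefix (seg : List Char) (hs : '#' ∉ seg) :
    ∀ (rest : List Char) (a pos pack : Int),
      settleChars (seg ++ rest) a pos pack
        = settleChars rest (a + seg.length) pos (pack + (seg.count 'O' : Int)) := by
  induction seg with
  | nil => intro rest a pos pack; simp
  | cons x t ih =>
    intro rest a pos pack
    have hxh : x ≠ '#' := fun hcontr => hs (hcontr ▸ List.mem_cons_self)
    have hst : '#' ∉ t := fun hcontr => hs (List.mem_cons_of_mem _ hcontr)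
    by_cases hxO : x = 'O'
    · subst hxO
      rw [List.cons_append, settleChars, if_pos rfl, ih hst rest (a + 1) pos (pack + 1)]
      have hc : ('O' :: t).count 'O' = t.count 'O' + 1 := by
        rw [List.count_cons]; simp
      rw [hc]
      congr 1 <;> push_cast [List.length_cons] <;> ring
    · rw [List.cons_append, settleChars, if_neg hxO, if_neg hxh,
        ih hst rest (a + 1) pos pack]
      have hc : (x :: t).count 'O' = t.count 'O' := by
        rw [List.count_cons, beq_eq_false_iff_ne.mpr hxO]
        simp
      rw [hc]
      congr 1
      push_cast [List.length_cons]
      ring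

theorem settle_tilt (cs : List Char) : ∀ (a j : Int),
    j ∈ settleChars cs a a 0 ↔ ∃ k : Nat, (tiltB cs)[k]? = some 'O' ∧ j = a + k := by
  induction hn : cs.length using Nat.strong_induction_on generalizing cs with
  | _ n ih =>
    subst hn
    intro a j
    by_cases h : '#' ∈ cs
    · obtain ⟨seg, rest, rfl, hs, hlt⟩ := hash_decomp _ h
      rw [settle_prefix seg hs ('#' :: rest) a a 0]
      rw [settleChars, if_neg (by decide), if_pos rfl]
      rw [tiltB_seg seg rest hs]
      have hlen : (tiltB seg).length = seg.length := tiltB_length seg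
      constructor
      · intro hj
        rcases List.mem_append.mp hj with h1 | h1
        · rw [PySem.List.mem_pyRange_one] at h1
          refine ⟨(j - a).toNat, ?_, by omega⟩
          rw [List.getElem?_append_left (by rw [hlen]; have := List.count_le_length (a := 'O') (l := seg); omega)]
          rw [tiltB_noHash seg hs, repOD_getElem]
          omega
        · rw [ih rest.length hlt rest rfl] at h1
          obtain ⟨k, hk, hj'⟩ := h1
          refine ⟨seg.length + 1 + k, ?_, by push_cast; omega⟩
          rw [List.getElem?_append_right (by omega), hlen]
          have h2 : seg.length + 1 + k - seg.length = k + 1 := by omega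
          rw [h2]
          simpa using hk
      · rintro ⟨k, hk, rfl⟩
        rcases Nat.lt_trichotomy k seg.length with hik | hik | hik
        · rw [List.getElem?_append_left (by omega)] at hk
          rw [tiltB_noHash seg hs, repOD_getElem] at hk
          apply List.mem_append.mpr (Or.inl _)
          rw [PySem.List.mem_pyRange_one]
          omega
        · subst hik
          rw [List.getElem?_append_right (by omega), hlen] at hk
          simp at hk
        · rw [List.getElem?_append_right (by omega), hlen] at hk
          have h2 : k - seg.length = (k - seg.length - 1) + 1 := by omega
          rw [h2] at hk
          simp only [List.getElem?_cons_succ] at hk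
          apply List.mem_append.mpr (Or.inr _)
          rw [ih rest.length hlt rest rfl]
          exact ⟨k - seg.length - 1, hk, by push_cast; omega⟩
    · have hfin : settleChars cs a a 0 = PySem.List.pyRange a (a + (cs.count 'O' : Int)) 1 := by
        have := settle_prefix cs h [] a a 0
        rw [List.append_nil] at this
        rw [this]
        simp [settleChars]
      rw [hfin, tiltB_noHash cs h, PySem.List.mem_pyRange_one]
      constructor
      · intro hj
        refine ⟨(j - a).toNat, ?_, by omega⟩
        rw [repOD_getElem]
        omega
      · rintro ⟨k, hk, rfl⟩
        rw [repOD_getElem] at hk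
        omega

-- ---------- chunk 4: A's lane scans ----------

def flushF (g : Int → Int × Int) (u v : Int) (s : PySem.Set (Int × Int)) : PySem.Set (Int × Int) :=
  (PySem.List.pyRange u v 1).foldl (fun r j => PySem.Set.add r (g j)) s

def scanStep (R C : PySem.Set (Int × Int)) (g : Int → Int × Int)
    (s : Int × Int × PySem.Set (Int × Int)) (i : Int) : Int × Int × PySem.Set (Int × Int) :=
  if g i ∈ R then (s.1, s.2.1 + 1, s.2.2)
  else if g i ∈ C then (i + 1, 0, flushF g s.1 (s.1 + s.2.1) s.2.2)
  else s

def scanRun (R C : PySem.Set (Int × Int)) (g : Int → Int × Int) (a b pos pack : Int)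
    (rolled : PySem.Set (Int × Int)) : PySem.Set (Int × Int) :=
  let st := (PySem.List.pyRange a b 1).foldl (scanStep R C g) (pos, pack, rolled)
  flushF g st.1 (st.1 + st.2.1) st.2.2

theorem flushF_eq (g : Int → Int × Int) (u v : Int) (s : PySem.Set (Int × Int)) :
    flushF g u v s = PySem.Set.update s ((PySem.List.pyRange u v 1).map g) := by
  rw [flushF, PySem.Set.update, List.foldl_map]

theorem flushF_mem (g : Int → Int × Int) (u v : Int) (s : PySem.Set (Int × Int)) (x : Int × Int) :
    x ∈ flushF g u v s ↔ x ∈ s ∨ ∃ i, u ≤ i ∧ i < v ∧ x = g i := by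
  rw [flushF_eq, PySem.Set.mem_update]
  constructor
  · rintro (h | h)
    · exact Or.inl h
    · rcases List.mem_map.mp h with ⟨i, hi, rfl⟩
      rw [PySem.List.mem_pyRange_one] at hi
      exact Or.inr ⟨i, hi.1, hi.2, rfl⟩
  · rintro (h | ⟨i, h1, h2, rfl⟩)
    · exact Or.inl h
    · exact Or.inr (List.mem_map.mpr ⟨i, PySem.List.mem_pyRange_one.mpr ⟨h1, h2⟩, rfl⟩)

theorem flushF_nodup (g : Int → Int × Int) (u v : Int) (s : PySem.Set (Int × Int))
    (h : s.Nodup) : (flushF g u v s).Nodup := by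
  rw [flushF_eq]; exact PySem.Set.nodup_update _ _ h

theorem scanRun_mem (R C : PySem.Set (Int × Int)) (g : Int → Int × Int) (b : Int) :
    ∀ (n : Nat) (a : Int), (b - a).toNat = n →
      ∀ (pos pack : Int) (rolled : PySem.Set (Int × Int)) (x : Int × Int),
        (x ∈ scanRun R C g a b pos pack rolled ↔
          x ∈ rolled ∨ ∃ i ∈ settleChars (laneOf R C g a b) a pos pack, x = g i) := by
  intro n
  induction n with
  | zero =>
    intro a hn pos pack rolled x
    have hba : b ≤ a := by omega
    rw [scanRun, laneOf, PySem.List.pyRange_one_eq_nil hba]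
    simp only [List.foldl_nil, List.map_nil, settleChars]
    rw [flushF_mem]
    constructor
    · rintro (h | ⟨i, h1, h2, rfl⟩)
      · exact Or.inl h
      · exact Or.inr ⟨i, PySem.List.mem_pyRange_one.mpr ⟨h1, h2⟩, rfl⟩
    · rintro (h | ⟨i, hi, rfl⟩)
      · exact Or.inl h
      · rw [PySem.List.mem_pyRange_one] at hi
        exact Or.inr ⟨i, hi.1, hi.2, rfl⟩
  | succ n ih =>
    intro a hn pos pack rolled x
    have hab : a < b := by omega
    have hlane : laneOf R C g a b = cellM R C (g a) :: laneOf R C g (a + 1) b := by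
      rw [laneOf, laneOf, PySem.List.pyRange_one_cons hab, List.map_cons]
    rw [scanRun, PySem.List.pyRange_one_cons hab]
    simp only [List.foldl_cons]
    rw [hlane]
    by_cases h1 : g a ∈ R
    · have hc : cellM R C (g a) = 'O' := by simp [cellM, h1]
      rw [hc]
      simp only [settleChars, reduceIte, scanStep, if_pos h1]
      exact ih (a + 1) (by omega) pos (pack + 1) rolled x
    · by_cases h2 : g a ∈ C
      · have hc : cellM R C (g a) = '#' := by simp [cellM, h1, h2]
        rw [hc]
        simp only [settleChars, reduceIte, scanStep, if_neg h1, if_pos h2]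
        refine Iff.trans (ih (a + 1) (by omega) (a + 1) 0 (flushF g pos (pos + pack) rolled) x) ?_
        rw [flushF_mem]
        constructor
        · rintro ((h | ⟨i, hi1, hi2, rfl⟩) | ⟨i, hi, rfl⟩)
          · exact Or.inl h
          · exact Or.inr ⟨i, List.mem_append.mpr (Or.inl (PySem.List.mem_pyRange_one.mpr ⟨hi1, hi2⟩)), rfl⟩
          · exact Or.inr ⟨i, List.mem_append.mpr (Or.inr hi), rfl⟩
        · rintro (h | ⟨i, hi, rfl⟩)
          · exact Or.inl (Or.inl h)
          · rcases List.mem_append.mp hi with h3 | h3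
            · rw [PySem.List.mem_pyRange_one] at h3
              exact Or.inl (Or.inr ⟨i, h3.1, h3.2, rfl⟩)
            · exact Or.inr ⟨i, h3, rfl⟩
      · have hc : cellM R C (g a) = '.' := by simp [cellM, h1, h2]
        rw [hc]
        simp only [settleChars, reduceIte, scanStep, if_neg h1, if_neg h2]
        exact ih (a + 1) (by omega) pos pack rolled x

theorem scanRun_nodup (R C : PySem.Set (Int × Int)) (g : Int → Int × Int) (b : Int) :
    ∀ (n : Nat) (a : Int), (b - a).toNat = n →
      ∀ (pos pack : Int) (rolled : PySem.Set (Int × Int)), rolled.Nodup →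
        (scanRun R C g a b pos pack rolled).Nodup := by
  intro n
  induction n with
  | zero =>
    intro a hn pos pack rolled hr
    have hba : b ≤ a := by omega
    rw [scanRun, PySem.List.pyRange_one_eq_nil hba]
    exact flushF_nodup _ _ _ _ hr
  | succ n ih =>
    intro a hn pos pack rolled hr
    have hab : a < b := by omega
    rw [scanRun, PySem.List.pyRange_one_cons hab]
    simp only [List.foldl_cons]
    by_cases h1 : g a ∈ R
    · simp only [scanStep, if_pos h1]
      exact ih (a + 1) (by omega) pos (pack + 1) rolled hr
    · by_cases h2 : g a ∈ C
      · simp only [scanStep, if_neg h1, if_pos h2]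
        exact ih (a + 1) (by omega) (a + 1) 0 _ (flushF_nodup _ _ _ _ hr)
      · simp only [scanStep, if_neg h1, if_neg h2]
        exact ih (a + 1) (by omega) pos pack rolled hr

-- the four rolls of A as lane scans through coordinate transforms
theorem rollNorth_eq (rounds cubes : PySem.Set (Int × Int)) (width height : Int) :
    rollNorth rounds cubes width height =
      (PySem.List.pyRange 0 width 1).foldl
        (fun rolled c => scanRun rounds cubes (fun i => (i, c)) 0 height 0 0 rolled)
        PySem.Set.empty := rfl

theorem rollWest_eq (rounds cubes : PySem.Set (Int × Int)) (width height : Int) :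
    rollWest rounds cubes width height =
      (PySem.List.pyRange 0 height 1).foldl
        (fun rolled l => scanRun rounds cubes (fun i => (l, i)) 0 width 0 0 rolled)
        PySem.Set.empty := rfl

theorem addsDesc (g : Int → Int × Int) (n posG pack : Int) (rolled : PySem.Set (Int × Int)) :
    (PySem.List.pyRange (n - 1 - posG) (n - 1 - posG - pack) (-1)).foldl
        (fun r i => PySem.Set.add r (g i)) rolled
      = (PySem.List.pyRange posG (posG + pack) 1).foldl
        (fun r j => PySem.Set.add r (g (n - 1 - j))) rolled := by
  rw [PySem.List.pyRange_neg_one, PySem.List.pyRange_one]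
  have h1 : n - 1 - posG - (n - 1 - posG - pack) = pack := by ring
  have h2 : posG + pack - posG = pack := by ring
  rw [h1, h2, List.foldl_map, List.foldl_map]
  apply PySem.List.foldl_congr_mem
  intro acc k _
  congr 2
  ring

theorem colDescAux (rounds cubes : List (Int × Int)) (n : Int) (g : Int → Int × Int)
    (ks : List Nat) :
    ∀ (posG pack : Int) (rolled : PySem.Set (Int × Int)),
    (let st := ks.foldl (fun (s : Int × Int × PySem.Set (Int × Int)) (k : Nat) =>
        if g (n - 1 - (k : Int)) ∈ rounds then (s.1, s.2.1 + 1, s.2.2)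
        else if g (n - 1 - (k : Int)) ∈ cubes then
          (n - 1 - (k : Int) - 1, 0,
            (PySem.List.pyRange s.1 (s.1 - s.2.1) (-1)).foldl (fun r i => PySem.Set.add r (g i)) s.2.2)
        else s) (n - 1 - posG, pack, rolled)
     (PySem.List.pyRange st.1 (st.1 - st.2.1) (-1)).foldl (fun r i => PySem.Set.add r (g i)) st.2.2)
    =
    (let st := ks.foldl (fun (s : Int × Int × PySem.Set (Int × Int)) (k : Nat) =>
        if g (n - 1 - (k : Int)) ∈ rounds then (s.1, s.2.1 + 1, s.2.2)
        else if g (n - 1 - (k : Int)) ∈ cubes then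
          ((k : Int) + 1, 0,
            (PySem.List.pyRange s.1 (s.1 + s.2.1) 1).foldl (fun r j => PySem.Set.add r (g (n - 1 - j))) s.2.2)
        else s) (posG, pack, rolled)
     (PySem.List.pyRange st.1 (st.1 + st.2.1) 1).foldl (fun r j => PySem.Set.add r (g (n - 1 - j))) st.2.2) := by
  induction ks with
  | nil => intro posG pack rolled; exact addsDesc g n posG pack rolled
  | cons k ks ih =>
    intro posG pack rolled
    simp only [List.foldl_cons]
    by_cases h1 : g (n - 1 - (k : Int)) ∈ rounds
    · simp only [if_pos h1]
      exact ih posG (pack + 1) rolled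
    · by_cases h2 : g (n - 1 - (k : Int)) ∈ cubes
      · simp only [if_neg h1, if_pos h2]
        have harith : n - 1 - (k : Int) - 1 = n - 1 - ((k : Int) + 1) := by ring
        rw [harith, addsDesc g n posG pack rolled]
        exact ih ((k : Int) + 1) 0 _
      · simp only [if_neg h1, if_neg h2]
        exact ih posG pack rolled

theorem rollSouth_eq (rounds cubes : PySem.Set (Int × Int)) (width height : Int) :
    rollSouth rounds cubes width height =
      (PySem.List.pyRange 0 width 1).foldl
        (fun rolled c => scanRun rounds cubes (fun i => (height - 1 - i, c)) 0 height 0 0 rolled)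
        PySem.Set.empty := by
  unfold rollSouth scanRun scanStep flushF
  congr 1
  funext rolled c
  have hrangeS : PySem.List.pyRange (height - 1) (-1) (-1)
      = (List.range height.toNat).map (fun (k : Nat) => height - 1 - (k : Int)) := by
    rw [PySem.List.pyRange_neg_one]
    have h : (height - 1 - (-1)).toNat = height.toNat := by omega
    rw [h]
  have hrangeG : PySem.List.pyRange 0 height 1
      = (List.range height.toNat).map (fun (k : Nat) => ((k : Int))) := by
    rw [PySem.List.pyRange_one]
    simp
  rw [hrangeS, hrangeG, List.foldl_map, List.foldl_map]
  have H := colDescAux rounds cubes height (fun i => (i, c)) (List.range height.toNat) 0 0 rolled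
  rw [sub_zero] at H
  exact H

theorem rollEast_eq (rounds cubes : PySem.Set (Int × Int)) (width height : Int) :
    rollEast rounds cubes width height =
      (PySem.List.pyRange 0 height 1).foldl
        (fun rolled l => scanRun rounds cubes (fun i => (l, width - 1 - i)) 0 width 0 0 rolled)
        PySem.Set.empty := by
  unfold rollEast scanRun scanStep flushF
  congr 1
  funext rolled l
  have hrangeS : PySem.List.pyRange (width - 1) (-1) (-1)
      = (List.range width.toNat).map (fun (k : Nat) => width - 1 - (k : Int)) := by
    rw [PySem.List.pyRange_neg_one]
    have h : (width - 1 - (-1)).toNat = width.toNat := by omega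
    rw [h]
  have hrangeG : PySem.List.pyRange 0 width 1
      = (List.range width.toNat).map (fun (k : Nat) => ((k : Int))) := by
    rw [PySem.List.pyRange_one]
    simp
  rw [hrangeS, hrangeG, List.foldl_map, List.foldl_map]
  have H := colDescAux rounds cubes width (fun x => (l, x)) (List.range width.toNat) 0 0 rolled
  rw [sub_zero] at H
  exact H

-- ---------- chunk 5: one tilted lane char by char ----------

def rollFoldD (R C : PySem.Set (Int × Int)) (g : Int → Int → Int × Int) (outer inner : Int) :
    PySem.Set (Int × Int) :=
  (PySem.List.pyRange 0 outer 1).foldl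
    (fun rolled o => scanRun R C (g o) 0 inner 0 0 rolled) PySem.Set.empty

theorem rollFold_fold_mem (R C : PySem.Set (Int × Int)) (g : Int → Int → Int × Int) (inner : Int) :
    ∀ (os : List Int) (init : PySem.Set (Int × Int)) (x : Int × Int),
      x ∈ os.foldl (fun rolled o => scanRun R C (g o) 0 inner 0 0 rolled) init ↔
        x ∈ init ∨ ∃ o ∈ os, ∃ k : Nat,
          (tiltB (laneOf R C (g o) 0 inner))[k]? = some 'O' ∧ x = g o k := by
  intro os
  induction os with
  | nil => intro init x; simp
  | cons o os ih =>
    intro init x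
    simp only [List.foldl_cons]
    refine Iff.trans (ih _ x) ?_
    rw [scanRun_mem R C (g o) inner ((inner - 0).toNat) 0 rfl 0 0 init x]
    constructor
    · rintro ((h | ⟨i, hi, rfl⟩) | ⟨o', ho', k, hk, rfl⟩)
      · exact Or.inl h
      · rcases (settle_tilt _ 0 i).mp hi with ⟨k, hk, rfl⟩
        exact Or.inr ⟨o, List.mem_cons_self, k, hk, by rw [zero_add]⟩
      · exact Or.inr ⟨o', List.mem_cons_of_mem _ ho', k, hk, rfl⟩
    · rintro (h | ⟨o', ho', k, hk, rfl⟩)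
      · exact Or.inl (Or.inl h)
      · rcases List.mem_cons.mp ho' with rfl | ho'
        · exact Or.inl (Or.inr ⟨0 + (k : Int), (settle_tilt _ 0 _).mpr ⟨k, hk, rfl⟩, by rw [zero_add]⟩)
        · exact Or.inr ⟨o', ho', k, hk, rfl⟩

theorem rollFold_mem (R C : PySem.Set (Int × Int)) (g : Int → Int → Int × Int)
    (outer inner : Int) (x : Int × Int) :
    x ∈ rollFoldD R C g outer inner ↔
      ∃ o, 0 ≤ o ∧ o < outer ∧ ∃ k : Nat,
        (tiltB (laneOf R C (g o) 0 inner))[k]? = some 'O' ∧ x = g o k := by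
  rw [rollFoldD, rollFold_fold_mem]
  constructor
  · rintro (h | ⟨o, ho, k, hk, rfl⟩)
    · exact absurd h List.not_mem_nil
    · rw [PySem.List.mem_pyRange_one] at ho
      exact ⟨o, ho.1, ho.2, k, hk, rfl⟩
  · rintro ⟨o, h1, h2, k, hk, rfl⟩
    exact Or.inr ⟨o, PySem.List.mem_pyRange_one.mpr ⟨h1, h2⟩, k, hk, rfl⟩

theorem rollFold_nodup (R C : PySem.Set (Int × Int)) (g : Int → Int → Int × Int)
    (outer inner : Int) : (rollFoldD R C g outer inner).Nodup := by
  rw [rollFoldD]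
  have H : ∀ (os : List Int) (init : PySem.Set (Int × Int)), init.Nodup →
      (os.foldl (fun rolled o => scanRun R C (g o) 0 inner 0 0 rolled) init).Nodup := by
    intro os
    induction os with
    | nil => intro init h; exact h
    | cons o os ih =>
      intro init h
      simp only [List.foldl_cons]
      exact ih _ (scanRun_nodup R C (g o) inner ((inner - 0).toNat) 0 rfl 0 0 init h)
  exact H _ _ List.nodup_nil

theorem lane_getElem (R C : PySem.Set (Int × Int)) (g : Int → Int × Int) (inner : Int)
    (k : Nat) (hk : (k : Int) < inner) :
    (laneOf R C g 0 inner)[k]? = some (cellM R C (g k)) := by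
  rw [laneOf, List.getElem?_map, PySem.List.getElem?_pyRange_one]
  rw [if_pos (by omega)]
  simp

theorem cellM_hash_iff (R C : PySem.Set (Int × Int)) (p : Int × Int) :
    cellM R C p = '#' ↔ p ∉ R ∧ p ∈ C := by
  rw [cellM]
  by_cases h1 : p ∈ R
  · rw [if_pos h1]
    constructor
    · intro h; exact absurd h (by decide)
    · rintro ⟨h, _⟩; exact absurd h1 h
  · rw [if_neg h1]
    by_cases h2 : p ∈ C
    · rw [if_pos h2]; simp [h1, h2]
    · rw [if_neg h2]
      constructor
      · intro h; exact absurd h (by decide)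
      · rintro ⟨_, h⟩; exact absurd h h2

theorem tilt_lane_char (R C : PySem.Set (Int × Int)) (g : Int → Int → Int × Int)
    (outer inner : Int)
    (hinj : ∀ o k o' k', 0 ≤ o → o < outer → 0 ≤ o' → o' < outer →
      0 ≤ k → k < inner → 0 ≤ k' → k' < inner → g o k = g o' k' → o = o' ∧ k = k')
    (hRC : ∀ p ∈ R, p ∉ C)
    (o : Int) (ho0 : 0 ≤ o) (ho : o < outer) (k : Nat) (hk : (k : Int) < inner) :
    (tiltB (laneOf R C (g o) 0 inner))[k]? =
      some (cellM (rollFoldD R C g outer inner) C (g o k)) := by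
  have hlanelen : (laneOf R C (g o) 0 inner).length = inner.toNat := by
    rw [laneOf, List.length_map, PySem.List.length_pyRange_one]
    omega
  have hlen : (tiltB (laneOf R C (g o) 0 inner)).length = inner.toNat := by
    rw [tiltB_length, hlanelen]
  have hkl : k < (tiltB (laneOf R C (g o) 0 inner)).length := by omega
  have hsome := List.getElem?_eq_getElem hkl
  have hmem := List.mem_of_getElem? hsome
  have hnotroll : (tiltB (laneOf R C (g o) 0 inner))[k] ≠ 'O' → g o ↑k ∉ rollFoldD R C g outer inner := by
    intro hne hcontr
    rcases (rollFold_mem R C g outer inner _).mp hcontr with ⟨o', h1, h2, k', hk', heq⟩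
    have hk'len : k' < (tiltB (laneOf R C (g o') 0 inner)).length := by
      rcases List.getElem?_eq_some_iff.mp hk' with ⟨hlt, _⟩
      exact hlt
    have hk'in : (k' : Int) < inner := by
      rw [tiltB_length, laneOf, List.length_map, PySem.List.length_pyRange_one] at hk'len
      omega
    obtain ⟨ho', hkk⟩ := hinj o' k' o k h1 h2 ho0 ho (by positivity) hk'in (by positivity) hk heq.symm
    subst ho'
    have : (k' : Nat) = k := by omega
    subst this
    rw [hsome] at hk'
    exact hne (by injection hk')
  rcases tiltB_chars _ _ hmem with hO | hH | hD
  · rw [hsome, hO]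
    have : g o (k : Int) ∈ rollFoldD R C g outer inner :=
      (rollFold_mem R C g outer inner _).mpr ⟨o, ho0, ho, k, by rw [hsome, hO], rfl⟩
    rw [cellM, if_pos this]
  · have hlane : (laneOf R C (g o) 0 inner)[k]? = some '#' := by
      rw [← tiltB_hash]; rw [hsome, hH]
    rw [lane_getElem R C (g o) inner k hk] at hlane
    have hcell : cellM R C (g o (k : Int)) = '#' := by injection hlane
    have hpc := (cellM_hash_iff R C _).mp hcell
    rw [hsome, hH, cellM, if_neg (hnotroll (by rw [hH]; decide)), if_pos hpc.2]
  · have hnC : g o (k : Int) ∉ C := by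
      intro hcontr
      have hnR : g o (k : Int) ∉ R := fun hR => hRC _ hR hcontr
      have hcell : cellM R C (g o (k : Int)) = '#' := (cellM_hash_iff R C _).mpr ⟨hnR, hcontr⟩
      have hlane : (laneOf R C (g o) 0 inner)[k]? = some '#' := by
        rw [lane_getElem R C (g o) inner k hk, hcell]
      rw [← tiltB_hash] at hlane
      rw [hsome] at hlane
      have : (tiltB (laneOf R C (g o) 0 inner))[k] = '#' := by injection hlane
      rw [hD] at this
      exact absurd this (by decide)
    rw [hsome, hD, cellM, if_neg (hnotroll (by rw [hD]; decide)), if_neg hnC]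

theorem rollFold_notC (R C : PySem.Set (Int × Int)) (g : Int → Int → Int × Int)
    (outer inner : Int) (hRC : ∀ p ∈ R, p ∉ C) :
    ∀ p ∈ rollFoldD R C g outer inner, p ∉ C := by
  intro p hp hpc
  rcases (rollFold_mem R C g outer inner p).mp hp with ⟨o, h1, h2, k, hk, rfl⟩
  have hkin : (k : Int) < inner := by
    rcases List.getElem?_eq_some_iff.mp hk with ⟨hlt, _⟩
    rw [tiltB_length, laneOf, List.length_map, PySem.List.length_pyRange_one] at hlt
    omega
  have hnR : g o (k : Int) ∉ R := fun hR => hRC _ hR hpc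
  have hcell : cellM R C (g o (k : Int)) = '#' := (cellM_hash_iff R C _).mpr ⟨hnR, hpc⟩
  have hlane : (laneOf R C (g o) 0 inner)[k]? = some '#' := by
    rw [lane_getElem R C (g o) inner k hkin, hcell]
  rw [← tiltB_hash] at hlane
  rw [hk] at hlane
  exact absurd (by injection hlane) (by decide : ¬ ('O' : Char) = '#')

-- ---------- chunk 6: one spin of B's grid is A's four rolls ----------

theorem pyGetD_map_range {α : Type} (F : Int → α) (n i : Int) (d : α)
    (h0 : 0 ≤ i) (hn : i < n) :
    (PySem.List.pyGet? ((PySem.List.pyRange 0 n 1).map F) i).getD d = F i := by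
  rw [PySem.List.pyGet?_of_nonneg _ h0, List.getElem?_map, PySem.List.getElem?_pyRange_one]
  rw [if_pos (by omega)]
  simp only [Option.map_some, Option.getD_some]
  congr 1
  omega

theorem rev_map_range {α : Type} (F : Int → α) (n : Int) :
    ((PySem.List.pyRange 0 n 1).map F).reverse
      = (PySem.List.pyRange 0 n 1).map (fun i => F (n - 1 - i)) := by
  apply List.ext_getElem
  · simp [PySem.List.length_pyRange_one]
  · intro k h1 h2
    rw [List.getElem_reverse]
    rw [List.getElem_map, List.getElem_map, PySem.List.getElem_pyRange_one,
      PySem.List.getElem_pyRange_one]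
    congr 1
    rw [List.length_reverse, List.length_map, PySem.List.length_pyRange_one] at h1
    simp only [List.length_map, PySem.List.length_pyRange_one]
    omega

theorem tilt_lane_eq_map (R C : PySem.Set (Int × Int)) (g : Int → Int → Int × Int)
    (outer inner : Int)
    (hinj : ∀ o k o' k', 0 ≤ o → o < outer → 0 ≤ o' → o' < outer →
      0 ≤ k → k < inner → 0 ≤ k' → k' < inner → g o k = g o' k' → o = o' ∧ k = k')
    (hRC : ∀ p ∈ R, p ∉ C)
    (o : Int) (ho0 : 0 ≤ o) (ho : o < outer) :
    tiltB (laneOf R C (g o) 0 inner)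
      = (PySem.List.pyRange 0 inner 1).map
          (fun i => cellM (rollFoldD R C g outer inner) C (g o i)) := by
  apply List.ext_getElem
  · rw [tiltB_length, laneOf]
    simp [PySem.List.length_pyRange_one]
  · intro k h1 h2
    have hkin : (k : Int) < inner := by
      rw [tiltB_length, laneOf, List.length_map, PySem.List.length_pyRange_one] at h1
      omega
    have := tilt_lane_char R C g outer inner hinj hRC o ho0 ho k hkin
    rw [List.getElem?_eq_getElem h1] at this
    have hval : (tiltB (laneOf R C (g o) 0 inner))[k]
        = cellM (rollFoldD R C g outer inner) C (g o k) := by injection this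
    rw [hval, List.getElem_map, PySem.List.getElem_pyRange_one]
    congr 2
    omega

-- the four transforms; each is injective on its index rectangle
theorem inj_gN (w h : Int) : ∀ o k o' k', 0 ≤ o → o < w → 0 ≤ o' → o' < w →
    0 ≤ k → k < h → 0 ≤ k' → k' < h →
    (fun (c i : Int) => (i, c)) o k = (fun (c i : Int) => (i, c)) o' k' → o = o' ∧ k = k' := by
  intro o k o' k' _ _ _ _ _ _ _ _ heq
  simp [Prod.ext_iff] at heq
  exact ⟨heq.2, heq.1⟩

theorem inj_gW (w h : Int) : ∀ o k o' k', 0 ≤ o → o < h → 0 ≤ o' → o' < h →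
    0 ≤ k → k < w → 0 ≤ k' → k' < w →
    (fun (l i : Int) => (l, i)) o k = (fun (l i : Int) => (l, i)) o' k' → o = o' ∧ k = k' := by
  intro o k o' k' _ _ _ _ _ _ _ _ heq
  simpa [Prod.ext_iff] using heq

theorem inj_gS (w h : Int) : ∀ o k o' k', 0 ≤ o → o < w → 0 ≤ o' → o' < w →
    0 ≤ k → k < h → 0 ≤ k' → k' < h →
    (fun (c i : Int) => (h - 1 - i, c)) o k = (fun (c i : Int) => (h - 1 - i, c)) o' k' →
    o = o' ∧ k = k' := by
  intro o k o' k' _ _ _ _ _ _ _ _ heq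
  simp [Prod.ext_iff] at heq
  omega

theorem inj_gE (w h : Int) : ∀ o k o' k', 0 ≤ o → o < h → 0 ≤ o' → o' < h →
    0 ≤ k → k < w → 0 ≤ k' → k' < w →
    (fun (l i : Int) => (l, w - 1 - i)) o k = (fun (l i : Int) => (l, w - 1 - i)) o' k' →
    o = o' ∧ k = k' := by
  intro o k o' k' _ _ _ _ _ _ _ _ heq
  simp [Prod.ext_iff] at heq
  omega

-- one full A cycle
def cycleA (C : PySem.Set (Int × Int)) (w h : Int) (r : PySem.Set (Int × Int)) :
    PySem.Set (Int × Int) :=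
  rollEast (rollSouth (rollWest (rollNorth r C w h) C w h) C w h) C w h

theorem mem_map_pyRange_bound {α : Type} (F : Int → α) (n : Int) (c : Int)
    (hc : c ∈ PySem.List.pyRange 0 n 1) : 0 ≤ c ∧ c < n := by
  rw [PySem.List.mem_pyRange_one] at hc
  exact hc

theorem spin_gridOf (R C : PySem.Set (Int × Int)) (w h : Int) (hRC : ∀ p ∈ R, p ∉ C) :
    spinB w h (gridOf R C w h) = gridOf (cycleA C w h R) C w h := by
  have hr1 : rollNorth R C w h = rollFoldD R C (fun c i => (i, c)) w h := rollNorth_eq R C w h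
  set r1 := rollFoldD R C (fun c i => (i, c)) w h with hr1d
  have hRC1 : ∀ p ∈ r1, p ∉ C := rollFold_notC R C _ w h hRC
  have hr2 : rollWest r1 C w h = rollFoldD r1 C (fun l i => (l, i)) h w := rollWest_eq r1 C w h
  set r2 := rollFoldD r1 C (fun l i => (l, i)) h w with hr2d
  have hRC2 : ∀ p ∈ r2, p ∉ C := rollFold_notC r1 C _ h w hRC1
  have hr3 : rollSouth r2 C w h = rollFoldD r2 C (fun c i => (h - 1 - i, c)) w h :=
    rollSouth_eq r2 C w h
  set r3 := rollFoldD r2 C (fun c i => (h - 1 - i, c)) w h with hr3d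
  have hRC3 : ∀ p ∈ r3, p ∉ C := rollFold_notC r2 C _ w h hRC2
  have hr4 : rollEast r3 C w h = rollFoldD r3 C (fun l i => (l, w - 1 - i)) h w :=
    rollEast_eq r3 C w h
  set r4 := rollFoldD r3 C (fun l i => (l, w - 1 - i)) h w with hr4d
  have hcyc : cycleA C w h R = r4 := by
    rw [cycleA, hr1, hr2, hr3, hr4]
  rw [hcyc]
  rw [spinB]
  -- north: the tilted columns
  have hcols : ((PySem.List.pyRange 0 w 1).map (fun c => tiltB (colChars (gridOf R C w h) c)))
      = (PySem.List.pyRange 0 w 1).map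
          (fun c => (PySem.List.pyRange 0 h 1).map (fun i => cellM r1 C (i, c))) := by
    apply List.map_congr_left
    intro c hc
    obtain ⟨hc0, hcw⟩ := mem_map_pyRange_bound (fun i => i) w c hc
    have hcol : colChars (gridOf R C w h) c = laneOf R C (fun i => (i, c)) 0 h := by
      rw [colChars, gridOf, List.map_map, laneOf]
      apply List.map_congr_left
      intro l _
      exact pyGetD_map_range (fun c' => cellM R C (l, c')) w c '.' hc0 hcw
    rw [hcol, tilt_lane_eq_map R C _ w h (inj_gN w h) hRC c hc0 hcw]
  rw [hcols]
  -- west: the tilted rows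
  have hrows : ((PySem.List.pyRange 0 h 1).map (fun l => tiltB (rowChars
        ((PySem.List.pyRange 0 w 1).map
          (fun c => (PySem.List.pyRange 0 h 1).map (fun i => cellM r1 C (i, c)))) l)))
      = (PySem.List.pyRange 0 h 1).map
          (fun l => (PySem.List.pyRange 0 w 1).map (fun i => cellM r2 C (l, i))) := by
    apply List.map_congr_left
    intro l hl
    obtain ⟨hl0, hlh⟩ := mem_map_pyRange_bound (fun i => i) h l hl
    have hrow : rowChars ((PySem.List.pyRange 0 w 1).map
          (fun c => (PySem.List.pyRange 0 h 1).map (fun i => cellM r1 C (i, c)))) l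
        = laneOf r1 C (fun i => (l, i)) 0 w := by
      rw [rowChars, List.map_map, laneOf]
      apply List.map_congr_left
      intro c _
      exact pyGetD_map_range (fun i => cellM r1 C (i, c)) h l '.' hl0 hlh
    rw [hrow, tilt_lane_eq_map r1 C _ h w (inj_gW w h) hRC1 l hl0 hlh]
  rw [hrows]
  -- south: reversed columns, tilted, reversed back
  have hcols2 : ((PySem.List.pyRange 0 w 1).map (fun c => (tiltB ((colChars
        ((PySem.List.pyRange 0 h 1).map
          (fun l => (PySem.List.pyRange 0 w 1).map (fun i => cellM r2 C (l, i)))) c).reverse)).reverse))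
      = (PySem.List.pyRange 0 w 1).map
          (fun c => (PySem.List.pyRange 0 h 1).map (fun l => cellM r3 C (l, c))) := by
    apply List.map_congr_left
    intro c hc
    obtain ⟨hc0, hcw⟩ := mem_map_pyRange_bound (fun i => i) w c hc
    have hcol : colChars ((PySem.List.pyRange 0 h 1).map
          (fun l => (PySem.List.pyRange 0 w 1).map (fun i => cellM r2 C (l, i)))) c
        = (PySem.List.pyRange 0 h 1).map (fun l => cellM r2 C (l, c)) := by
      rw [colChars, List.map_map]
      apply List.map_congr_left
      intro l _
      exact pyGetD_map_range (fun i => cellM r2 C (l, i)) w c '.' hc0 hcw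
    rw [hcol, rev_map_range]
    have hlane : (PySem.List.pyRange 0 h 1).map (fun i => cellM r2 C (h - 1 - i, c))
        = laneOf r2 C (fun i => (h - 1 - i, c)) 0 h := rfl
    rw [hlane, tilt_lane_eq_map r2 C _ w h (inj_gS w h) hRC2 c hc0 hcw, rev_map_range]
    apply List.map_congr_left
    intro l _
    congr 2
    ring
  rw [hcols2]
  -- east: reversed rows, tilted, reversed back
  rw [gridOf]
  apply List.map_congr_left
  intro l hl
  obtain ⟨hl0, hlh⟩ := mem_map_pyRange_bound (fun i => i) h l hl
  have hrow : rowChars ((PySem.List.pyRange 0 w 1).map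
        (fun c => (PySem.List.pyRange 0 h 1).map (fun l' => cellM r3 C (l', c)))) l
      = (PySem.List.pyRange 0 w 1).map (fun c => cellM r3 C (l, c)) := by
    rw [rowChars, List.map_map]
    apply List.map_congr_left
    intro c _
    exact pyGetD_map_range (fun l' => cellM r3 C (l', c)) h l '.' hl0 hlh
  rw [hrow, rev_map_range]
  have hlane : (PySem.List.pyRange 0 w 1).map (fun i => cellM r3 C (l, w - 1 - i))
      = laneOf r3 C (fun i => (l, w - 1 - i)) 0 w := rfl
  rw [hlane, tilt_lane_eq_map r3 C _ h w (inj_gE w h) hRC3 l hl0 hlh, rev_map_range]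
  apply List.map_congr_left
  intro c _
  congr 2
  ring

theorem cycleA_good (R C : PySem.Set (Int × Int)) (w h : Int) (hgood : GoodR C w h R) :
    GoodR C w h (cycleA C w h R) := by
  have hRC : ∀ p ∈ R, p ∉ C := fun p hp => (hgood.2 p hp).2.2.2.2
  have hRC1 : ∀ p ∈ rollFoldD R C (fun c i => (i, c)) w h, p ∉ C :=
    rollFold_notC R C _ w h hRC
  have hRC2 : ∀ p ∈ rollFoldD (rollFoldD R C (fun c i => (i, c)) w h) C (fun l i => (l, i)) h w, p ∉ C :=
    rollFold_notC _ C _ h w hRC1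
  have hRC3 : ∀ p ∈ rollFoldD (rollFoldD (rollFoldD R C (fun c i => (i, c)) w h) C
      (fun l i => (l, i)) h w) C (fun c i => (h - 1 - i, c)) w h, p ∉ C :=
    rollFold_notC _ C _ w h hRC2
  have hcyc : cycleA C w h R = rollFoldD (rollFoldD (rollFoldD (rollFoldD R C (fun c i => (i, c)) w h)
      C (fun l i => (l, i)) h w) C (fun c i => (h - 1 - i, c)) w h) C (fun l i => (l, w - 1 - i)) h w := by
    rw [cycleA, rollNorth_eq, rollWest_eq, rollSouth_eq, rollEast_eq]
    rfl
  rw [hcyc]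
  refine ⟨rollFold_nodup _ _ _ _ _, ?_⟩
  intro p hp
  rcases (rollFold_mem _ _ _ _ _ p).mp hp with ⟨o, h1, h2, k, hk, rfl⟩
  have hkin : (k : Int) < w := by
    rcases List.getElem?_eq_some_iff.mp hk with ⟨hlt, _⟩
    rw [tiltB_length, laneOf, List.length_map, PySem.List.length_pyRange_one] at hlt
    omega
  refine ⟨by omega, by omega, by omega, by omega, ?_⟩
  exact rollFold_notC _ C _ h w hRC3 _ hp

-- ---------- chunk 7: canonical states and grid equality ----------

def canon (r : PySem.Set (Int × Int)) : List (Int × Int) :=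
  PySem.List.sorted2 r (fun p => p.1) (fun p => p.2) false

theorem canon_eq_sortedLex (r : PySem.Set (Int × Int)) :
    canon r = PySem.List.sorted r (fun p : Int × Int => toLex p) false := by
  have hcomp : (fun a b : Int × Int =>
        decide (a.1 < b.1) || (!decide (b.1 < a.1) && decide (a.2 < b.2)))
      = (fun a b : Int × Int => decide (toLex a < toLex b)) := by
    funext a b
    rcases lt_trichotomy a.1 b.1 with h | h | h
    · simp [h, Prod.Lex.lt_iff, le_of_lt h]
    · simp [h, Prod.Lex.lt_iff]
    · simp [h, Prod.Lex.lt_iff, not_lt_of_gt h, ne_of_gt h]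
  rw [canon, PySem.List.sorted2, PySem.List.sorted_eq_foldl_insertBy]
  simp only [Bool.false_eq_true, if_false]
  rw [hcomp]

theorem canon_perm_eq (r r' : PySem.Set (Int × Int)) (hp : List.Perm r r') :
    canon r = canon r' := by
  rw [canon_eq_sortedLex, canon_eq_sortedLex]
  apply PySem.List.eq_of_perm_of_pairwise_le_of_injective (fun p : Int × Int => toLex p)
    toLex.injective
  · exact ((PySem.List.sorted_perm r _ false).trans hp).trans
      (PySem.List.sorted_perm r' _ false).symm
  · exact PySem.List.sorted_pairwise r _
  · exact PySem.List.sorted_pairwise r' _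

theorem canon_eq_iff (r r' : PySem.Set (Int × Int)) (h : r.Nodup) (h' : r'.Nodup) :
    canon r = canon r' ↔ ∀ p, p ∈ r ↔ p ∈ r' := by
  constructor
  · intro he p
    have h1 : List.Perm r (canon r) := (PySem.List.sorted2_perm r _ _ false).symm
    have h2 : List.Perm (canon r') r' := PySem.List.sorted2_perm r' _ _ false
    have := (h1.trans (he ▸ h2))
    exact ⟨fun hp => this.mem_iff.mp hp, fun hp => this.mem_iff.mpr hp⟩
  · intro hmem
    apply canon_perm_eq
    apply List.perm_of_nodup_nodup_toFinset_eq h h'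
    ext p
    simp [List.mem_toFinset, hmem p]

theorem gridOf_cell (R C : PySem.Set (Int × Int)) (w h l c : Int)
    (hl0 : 0 ≤ l) (hlh : l < h) (hc0 : 0 ≤ c) (hcw : c < w) :
    (PySem.List.pyGet? ((PySem.List.pyGet? (gridOf R C w h) l).getD []) c).getD '.'
      = cellM R C (l, c) := by
  rw [gridOf, pyGetD_map_range _ h l [] hl0 hlh, pyGetD_map_range _ w c '.' hc0 hcw]

theorem cellM_O_iff (R C : PySem.Set (Int × Int)) (p : Int × Int) :
    cellM R C p = 'O' ↔ p ∈ R := by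
  rw [cellM]
  by_cases h1 : p ∈ R
  · simp [h1]
  · rw [if_neg h1]
    by_cases h2 : p ∈ C
    · simp [h2, h1]
    · simp [h2, h1]

theorem gridOf_eq_iff (R R' C : PySem.Set (Int × Int)) (w h : Int)
    (hg : GoodR C w h R) (hg' : GoodR C w h R') :
    gridOf R C w h = gridOf R' C w h ↔ ∀ p, p ∈ R ↔ p ∈ R' := by
  constructor
  · intro he p
    constructor
    · intro hp
      obtain ⟨h1, h2, h3, h4, _⟩ := hg.2 p hp
      have hc := gridOf_cell R C w h p.1 p.2 h1 h2 h3 h4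
      rw [he, gridOf_cell R' C w h p.1 p.2 h1 h2 h3 h4] at hc
      have hc' : cellM R' C p = cellM R C p := hc
      exact (cellM_O_iff R' C p).mp (by rw [hc']; exact (cellM_O_iff R C p).mpr hp)
    · intro hp
      obtain ⟨h1, h2, h3, h4, _⟩ := hg'.2 p hp
      have hc := gridOf_cell R C w h p.1 p.2 h1 h2 h3 h4
      rw [he, gridOf_cell R' C w h p.1 p.2 h1 h2 h3 h4] at hc
      have hc' : cellM R' C p = cellM R C p := hc
      exact (cellM_O_iff R C p).mp (by rw [← hc']; exact (cellM_O_iff R' C p).mpr hp)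
  · intro hmem
    rw [gridOf, gridOf]
    apply List.map_congr_left
    intro l _
    apply List.map_congr_left
    intro c _
    rw [cellM, cellM]
    by_cases hp : (l, c) ∈ R
    · rw [if_pos hp, if_pos ((hmem (l, c)).mp hp)]
    · rw [if_neg hp, if_neg (fun hp' => hp ((hmem (l, c)).mpr hp'))]

-- ---------- chunk 8: the recorded load ----------

theorem pyGetD_map_range' {α : Type} (F : Int → α) (n i : Int) (d : α)
    (h0 : 0 ≤ i) (hn : i < n) :
    PySem.List.pyGetD ((PySem.List.pyRange 0 n 1).map F) i d = F i := by
  rw [PySem.List.pyGetD_eq_getElem _ d h0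
    (by rw [List.length_map, PySem.List.length_pyRange_one]; omega)]
  rw [List.getElem_map, PySem.List.getElem_pyRange_one]
  congr 1
  omega

theorem load_gridOf (R C : PySem.Set (Int × Int)) (w h : Int) (h0 : 0 ≤ h)
    (hg : GoodR C w h R) :
    loadB h (gridOf R C w h) = (R.map (fun p : Int × Int => h - p.1)).sum := by
  have hlen : (gridOf R C w h).length = h.toNat := by
    rw [gridOf, List.length_map, PySem.List.length_pyRange_one]; omega
  have hlenI : PySem.List.len (gridOf R C w h) = h := by
    rw [PySem.List.len_eq, hlen]; omega
  rw [loadB, PySem.List.enumerate_eq_map_pyRange _ [], hlenI, List.map_map]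
  -- the per-row term
  have hterm : ∀ l ∈ PySem.List.pyRange 0 h 1,
      ((fun p : Int × List Char => (h - p.1) * (PySem.Chars.count p.2 ['O'] : Int)) ∘
        fun j => (j, PySem.List.pyGetD (gridOf R C w h) j []))
        l
        = (h - l) * ((PySem.List.pyRange 0 w 1).countP (fun c => decide ((l, c) ∈ R)) : Int) := by
    intro l hl
    obtain ⟨hl0, hlh⟩ := mem_map_pyRange_bound (fun i => i) h l hl
    have hrow : PySem.List.pyGetD (gridOf R C w h) l []
        = (PySem.List.pyRange 0 w 1).map (fun c => cellM R C (l, c)) := by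
      rw [gridOf]
      exact pyGetD_map_range' _ h l [] hl0 hlh
    simp only [Function.comp_apply]
    rw [hrow, count_single, List.count_eq_countP, List.countP_map]
    congr 2
    apply List.countP_congr
    intro c _
    simp only [Function.comp_apply, beq_iff_eq, decide_eq_true_eq]
    exact cellM_O_iff R C (l, c)
  rw [List.map_congr_left hterm]
  -- the stone set as a flatMap over rows
  set L := (PySem.List.pyRange 0 h 1).flatMap
    (fun l => ((PySem.List.pyRange 0 w 1).filter (fun c => decide ((l, c) ∈ R))).map
      (fun c => (l, c))) with hL
  have hmemL : ∀ p : Int × Int, p ∈ L ↔ p ∈ R := by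
    intro p
    rw [hL, List.mem_flatMap]
    constructor
    · rintro ⟨l, hl, hp⟩
      rcases List.mem_map.mp hp with ⟨c, hc, rfl⟩
      have := (List.mem_filter.mp hc).2
      simpa using this
    · intro hp
      obtain ⟨h1, h2, h3, h4, _⟩ := hg.2 p hp
      refine ⟨p.1, PySem.List.mem_pyRange_one.mpr ⟨h1, h2⟩, ?_⟩
      apply List.mem_map.mpr
      refine ⟨p.2, List.mem_filter.mpr ⟨PySem.List.mem_pyRange_one.mpr ⟨h3, h4⟩, by simpa using hp⟩, rfl⟩
  have hnodupL : L.Nodup := by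
    rw [hL, List.nodup_flatMap]
    constructor
    · intro l _
      exact ((PySem.List.nodup_pyRange_one 0 w).filter _).map
        (fun c c' hcc => by simpa using hcc)
    · have : ∀ (l l' : Int), l ≠ l' → Function.onFun List.Disjoint
          (fun l => ((PySem.List.pyRange 0 w 1).filter (fun c => decide ((l, c) ∈ R))).map
            (fun c => (l, c))) l l' := by
        intro l l' hne p hp hp'
        rcases List.mem_map.mp hp with ⟨c, _, rfl⟩
        rcases List.mem_map.mp hp' with ⟨c', _, heq⟩
        exact hne (congrArg Prod.fst heq).symm
      exact List.Pairwise.imp_of_mem (fun {a b} _ _ h => this a b h)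
        ((PySem.List.pairwise_lt_pyRange_one 0 h).imp (fun hab => ne_of_lt hab))
  have hperm : List.Perm R L :=
    List.perm_of_nodup_nodup_toFinset_eq hg.1 hnodupL
      (by ext p; simp only [List.mem_toFinset]; exact (hmemL p).symm)
  rw [(hperm.map (fun p : Int × Int => h - p.1)).sum_eq]
  rw [hL, List.map_flatMap, List.flatMap_def, List.sum_flatten, List.map_map]
  apply congrArg List.sum
  apply List.map_congr_left
  intro l _
  simp only [Function.comp_apply, List.map_map]
  have hconst : ((fun p : Int × Int => h - p.1) ∘ fun c => (l, c)) = fun _ => h - l := rfl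
  rw [hconst, PySem.List.sum_map_const_int, List.countP_eq_length_filter]
  ring

-- ---------- chunk 9: the parsed sets and the initial grid ----------

theorem andO (ch : Char) : ((ch == 'O') && (ch != '.')) = (ch == 'O') := by
  by_cases h : ch = 'O' <;> simp [h]

theorem parseA_fst (data : String) :
    (parseA data).1 = PySem.Set.ofList
      ((PySem.List.enumerate (PySem.Str.splitlines data)).flatMap (fun p =>
        ((PySem.List.enumerate p.2.toList).filter (fun q => q.2 == 'O')).map (fun q => (p.1, q.1)))) := by
  show PySem.Set.ofList ((((PySem.List.enumerate (PySem.Str.splitlines data)).flatMap (fun p =>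
      ((PySem.List.enumerate p.2.toList).filter (fun q => q.2 != '.')).map
        (fun q => (p.1, q.1, q.2)))).filter (fun r => r.2.2 == 'O')).map (fun r => (r.1, r.2.1))) = _
  congr 1
  rw [List.filter_flatMap, List.map_flatMap]
  congr 1
  funext p
  rw [List.filter_map, List.map_map, List.filter_filter]
  exact congr (congrArg List.map (funext fun q => rfl))
    (List.filter_congr fun q _ => andO q.2)

theorem andC (ch : Char) : ((ch == '#') && (ch != '.')) = (ch == '#') := by
  by_cases h : ch = '#' <;> simp [h]

theorem parseA_snd (data : String) :
    (parseA data).2 = PySem.Set.ofList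
      ((PySem.List.enumerate (PySem.Str.splitlines data)).flatMap (fun p =>
        ((PySem.List.enumerate p.2.toList).filter (fun q => q.2 == '#')).map (fun q => (p.1, q.1)))) := by
  show PySem.Set.ofList ((((PySem.List.enumerate (PySem.Str.splitlines data)).flatMap (fun p =>
      ((PySem.List.enumerate p.2.toList).filter (fun q => q.2 != '.')).map
        (fun q => (p.1, q.1, q.2)))).filter (fun r => r.2.2 == '#')).map (fun r => (r.1, r.2.1))) = _
  congr 1
  rw [List.filter_flatMap, List.map_flatMap]
  congr 1
  funext p
  rw [List.filter_map, List.map_map, List.filter_filter]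
  exact congr (congrArg List.map (funext fun q => rfl))
    (List.filter_congr fun q _ => andC q.2)

theorem mem_flatEnum (lines : List String) (ch : Char) (p : Int × Int) :
    p ∈ (PySem.List.enumerate lines).flatMap (fun q =>
        ((PySem.List.enumerate q.2.toList).filter (fun r => r.2 == ch)).map (fun r => (q.1, r.1))) ↔
      ∃ (l c : Nat) (hl : l < lines.length) (hc : c < lines[l].toList.length),
        lines[l].toList[c] = ch ∧ p = ((l : Int), (c : Int)) := by
  rw [List.mem_flatMap]
  constructor
  · rintro ⟨q, hq, hp⟩
    rw [PySem.List.mem_enumerate_iff] at hq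
    obtain ⟨l, hl, rfl⟩ := hq
    rcases List.mem_map.mp hp with ⟨r, hr, rfl⟩
    rcases List.mem_filter.mp hr with ⟨hr1, hr2⟩
    rw [PySem.List.mem_enumerate_iff] at hr1
    obtain ⟨c, hc, rfl⟩ := hr1
    exact ⟨l, c, hl, hc, by simpa using hr2, by simp⟩
  · rintro ⟨l, c, hl, hc, hch, rfl⟩
    refine ⟨((l : Int), lines[l]), (PySem.List.mem_enumerate_iff lines 0 _).mpr ⟨l, hl, by simp⟩, ?_⟩
    apply List.mem_map.mpr
    refine ⟨((c : Int), lines[l].toList[c]),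
      List.mem_filter.mpr ⟨(PySem.List.mem_enumerate_iff _ 0 _).mpr ⟨c, hc, by simp⟩,
        by simp [hch]⟩, by simp⟩

theorem mem_parse_fst (data : String) (p : Int × Int) :
    p ∈ (parseA data).1 ↔
      ∃ (l c : Nat) (hl : l < (PySem.Str.splitlines data).length)
        (hc : c < (PySem.Str.splitlines data)[l].toList.length),
        (PySem.Str.splitlines data)[l].toList[c] = 'O' ∧ p = ((l : Int), (c : Int)) := by
  rw [parseA_fst, PySem.Set.mem_ofList]
  exact mem_flatEnum _ 'O' p

theorem mem_parse_snd (data : String) (p : Int × Int) :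
    p ∈ (parseA data).2 ↔
      ∃ (l c : Nat) (hl : l < (PySem.Str.splitlines data).length)
        (hc : c < (PySem.Str.splitlines data)[l].toList.length),
        (PySem.Str.splitlines data)[l].toList[c] = '#' ∧ p = ((l : Int), (c : Int)) := by
  rw [parseA_snd, PySem.Set.mem_ofList]
  exact mem_flatEnum _ '#' p

theorem parse_good (data : String) (hne : PySem.Str.splitlines data ≠ [])
    (hO : ∀ line ∈ PySem.Str.splitlines data,
      'O' ∉ line.toList.drop ((PySem.Str.splitlines data).headI.toList.length)) :
    GoodR (parseA data).2 ((PySem.Str.splitlines data).headI.toList.length)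
      ((PySem.Str.splitlines data).length) (parseA data).1 := by
  constructor
  · rw [parseA_fst]; exact PySem.Set.nodup_ofList _
  · intro p hp
    rw [mem_parse_fst] at hp
    obtain ⟨l, c, hl, hc, hch, rfl⟩ := hp
    have hcw : c < (PySem.Str.splitlines data).headI.toList.length := by
      by_contra hge
      apply hO (PySem.Str.splitlines data)[l] (List.getElem_mem hl)
      have hdl : c - (PySem.Str.splitlines data).headI.toList.length <
          ((PySem.Str.splitlines data)[l].toList.drop
            ((PySem.Str.splitlines data).headI.toList.length)).length := by
        rw [List.length_drop]; omega
      have hval : ((PySem.Str.splitlines data)[l].toList.drop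
          ((PySem.Str.splitlines data).headI.toList.length))[c -
            (PySem.Str.splitlines data).headI.toList.length]? = some 'O' := by
        rw [List.getElem?_drop,
          show (PySem.Str.splitlines data).headI.toList.length +
            (c - (PySem.Str.splitlines data).headI.toList.length) = c by omega,
          List.getElem?_eq_getElem hc, hch]
      exact List.mem_of_getElem? hval
    refine ⟨by positivity, ?_, by positivity, ?_, ?_⟩
    · show ((l : Nat) : Int) < _
      exact_mod_cast hl
    · show ((c : Nat) : Int) < _
      exact_mod_cast hcw
    intro hcontr
    rw [mem_parse_snd] at hcontr
    obtain ⟨l', c', hl', hc', hch', heq⟩ := hcontr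
    have hll : l' = l := by
      have := congrArg Prod.fst heq
      simpa using this.symm
    have hcc : c' = c := by
      have := congrArg Prod.snd heq
      simpa using this.symm
    subst hll; subst hcc
    rw [hch] at hch'
    exact absurd hch' (by decide)

theorem gridInit_eq (data : String) (hne : PySem.Str.splitlines data ≠ [])
    (hO : ∀ line ∈ PySem.Str.splitlines data,
      'O' ∉ line.toList.drop ((PySem.Str.splitlines data).headI.toList.length)) :
    gridInit (PySem.Str.splitlines data)
        ((PySem.Str.splitlines data).headI.toList.length)
      = gridOf (parseA data).1 (parseA data).2
          ((PySem.Str.splitlines data).headI.toList.length)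
          ((PySem.Str.splitlines data).length) := by
  set lines := PySem.Str.splitlines data with hlines
  set w : Int := ((lines.headI.toList.length : Nat) : Int) with hw
  set h : Int := ((lines.length : Nat) : Int) with hh
  apply List.ext_getElem
  · simp only [gridInit, gridOf, List.length_map, PySem.List.length_pyRange_one]
    omega
  · intro l hl1 hl2
    simp only [gridInit, List.length_map] at hl1
    simp only [gridInit, gridOf]
    rw [List.getElem_map, List.getElem_map, PySem.List.getElem_pyRange_one]
    apply List.map_congr_left
    intro c hcr
    obtain ⟨hc0, hcw⟩ := mem_map_pyRange_bound (fun i => i) w c hcr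
    have hcell : cellM (parseA data).1 (parseA data).2 (0 + (l : Int), c)
        = cellM (parseA data).1 (parseA data).2 ((l : Int), c) := by
      congr 2
      omega
    rw [hcell, cellB]
    by_cases hlt : c < PySem.Str.len lines[l]
    · rw [if_pos hlt]
      have hcl : c.toNat < lines[l].toList.length := by
        rw [PySem.Str.len_eq] at hlt
        omega
      have hget : (PySem.Str.pyGet? lines[l] c).getD '.' = lines[l].toList[c.toNat] := by
        have h1 : PySem.Str.pyGet? lines[l] c = lines[l].toList[c.toNat]? := by
          conv_lhs => rw [show c = ((c.toNat : Nat) : Int) by omega]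
          rw [PySem.Str.pyGet?_natCast]
        rw [h1, List.getElem?_eq_getElem hcl]
        rfl
      rw [hget]
      have hRiff : ((l : Int), c) ∈ (parseA data).1 ↔ lines[l].toList[c.toNat] = 'O' := by
        rw [mem_parse_fst]
        constructor
        · rintro ⟨l', c', hl', hc', hch', heq⟩
          have hll : l' = l := by
            have := congrArg Prod.fst heq; simp at this; omega
          have hcc : c' = c.toNat := by
            have := congrArg Prod.snd heq; simp at this; omega
          subst hll; subst hcc; exact hch'
        · intro hch
          exact ⟨l, c.toNat, hl1, hcl, hch, by simp [Prod.ext_iff]; omega⟩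
      have hCiff : ((l : Int), c) ∈ (parseA data).2 ↔ lines[l].toList[c.toNat] = '#' := by
        rw [mem_parse_snd]
        constructor
        · rintro ⟨l', c', hl', hc', hch', heq⟩
          have hll : l' = l := by
            have := congrArg Prod.fst heq; simp at this; omega
          have hcc : c' = c.toNat := by
            have := congrArg Prod.snd heq; simp at this; omega
          subst hll; subst hcc; exact hch'
        · intro hch
          exact ⟨l, c.toNat, hl1, hcl, hch, by simp [Prod.ext_iff]; omega⟩
      by_cases hO' : lines[l].toList[c.toNat] = 'O'
      · rw [cellM, if_pos (hRiff.mpr hO'), hO']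
        simp
      · by_cases hH' : lines[l].toList[c.toNat] = '#'
        · rw [cellM, if_neg (fun hm => hO' (hRiff.mp hm)), if_pos (hCiff.mpr hH'), hH']
          simp
        · rw [cellM, if_neg (fun hm => hO' (hRiff.mp hm)), if_neg (fun hm => hH' (hCiff.mp hm))]
          simp [hO', hH']
    · rw [if_neg hlt]
      have hnR : ((l : Int), c) ∉ (parseA data).1 := by
        intro hcontr
        rw [mem_parse_fst] at hcontr
        obtain ⟨l', c', hl', hc', hch', heq⟩ := hcontr
        have hll : (l' : Int) = l := by simpa using (congrArg Prod.fst heq).symm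
        have hcc : (c' : Int) = c := by simpa using (congrArg Prod.snd heq).symm
        rw [PySem.Str.len_eq] at hlt
        have : l' = l := by omega
        subst this
        simp only [← hlines] at hc'
        omega
      have hnC : ((l : Int), c) ∉ (parseA data).2 := by
        intro hcontr
        rw [mem_parse_snd] at hcontr
        obtain ⟨l', c', hl', hc', hch', heq⟩ := hcontr
        have hll : (l' : Int) = l := by simpa using (congrArg Prod.fst heq).symm
        have hcc : (c' : Int) = c := by simpa using (congrArg Prod.snd heq).symm
        rw [PySem.Str.len_eq] at hlt
        have : l' = l := by omega
        subst this
        simp only [← hlines] at hc'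
        omega
      rw [cellM, if_neg hnR, if_neg hnC]
      simp

-- ---------- chunk 10: the cycle loops and the final selection ----------

def LoopInv (C : PySem.Set (Int × Int)) (w h : Int) (R : List (PySem.Set (Int × Int)))
    (seen : PySem.Dict (List (Int × Int)) Int)
    (index : PySem.Dict (List (List Char)) Int) (loads : List Int) : Prop :=
  (∀ r ∈ R, GoodR C w h r) ∧
  PySem.Dict.items seen = List.zip (R.map canon) loads ∧
  PySem.Dict.items index
    = (R.map (fun r => gridOf r C w h)).zipIdx.map (fun p => (p.1, ((p.2 : Nat) : Int))) ∧
  R.length = loads.length ∧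
  (R.map canon).Nodup

theorem LoopInv_keys_seen {C : PySem.Set (Int × Int)} {w h : Int} {R seen index loads}
    (hInv : LoopInv C w h R seen index loads) :
    PySem.Dict.keys seen = R.map canon := by
  show (PySem.Dict.items seen).map Prod.fst = _
  rw [hInv.2.1]
  exact List.map_fst_zip (by rw [List.length_map, hInv.2.2.2.1])

theorem LoopInv_keys_index {C : PySem.Set (Int × Int)} {w h : Int} {R seen index loads}
    (hInv : LoopInv C w h R seen index loads) :
    PySem.Dict.keys index = R.map (fun r => gridOf r C w h) := by
  show (PySem.Dict.items index).map Prod.fst = _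
  rw [hInv.2.2.1, List.map_map]
  rw [show (Prod.fst ∘ fun (p : List (List Char) × Nat) => (p.1, ((p.2 : Nat) : Int))) = Prod.fst from rfl]
  exact List.zipIdx_map_fst 0 _

theorem grid_canon_iff {C : PySem.Set (Int × Int)} {w h : Int} (r r' : PySem.Set (Int × Int))
    (hg : GoodR C w h r) (hg' : GoodR C w h r') :
    gridOf r C w h = gridOf r' C w h ↔ canon r = canon r' := by
  rw [gridOf_eq_iff r r' C w h hg hg', canon_eq_iff r r' hg.1 hg'.1]

theorem contains_equiv {C : PySem.Set (Int × Int)} {w h : Int} {R seen index loads}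
    (hInv : LoopInv C w h R seen index loads) (r4 : PySem.Set (Int × Int))
    (hg4 : GoodR C w h r4) :
    PySem.Dict.contains index (gridOf r4 C w h) = PySem.Dict.contains seen (canon r4) := by
  rw [PySem.Dict.contains_eq_decide_mem_keys, PySem.Dict.contains_eq_decide_mem_keys,
    LoopInv_keys_seen hInv, LoopInv_keys_index hInv]
  simp only [decide_eq_decide]
  constructor
  · intro hm
    rcases List.mem_map.mp hm with ⟨r, hr, he⟩
    exact List.mem_map.mpr ⟨r, hr,
      (grid_canon_iff r r4 (hInv.1 r hr) hg4).mp he⟩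
  · intro hm
    rcases List.mem_map.mp hm with ⟨r, hr, he⟩
    exact List.mem_map.mpr ⟨r, hr,
      (grid_canon_iff r r4 (hInv.1 r hr) hg4).mpr he⟩

theorem LoopInv_insert {C : PySem.Set (Int × Int)} {w h : Int} {R seen index loads}
    (h0 : 0 ≤ h)
    (hInv : LoopInv C w h R seen index loads) (r4 : PySem.Set (Int × Int))
    (hg4 : GoodR C w h r4)
    (hc : PySem.Dict.contains seen (canon r4) = false) :
    LoopInv C w h (R ++ [r4])
      (PySem.Dict.insert seen (canon r4) ((r4.map (fun p => h - p.1)).sum))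
      (PySem.Dict.insert index (gridOf r4 C w h) (PySem.List.len loads))
      (loads ++ [loadB h (gridOf r4 C w h)]) := by
  have hcB : PySem.Dict.contains index (gridOf r4 C w h) = false := by
    rw [contains_equiv hInv r4 hg4]; exact hc
  have hnotmem : canon r4 ∉ R.map canon := by
    intro hm
    rw [← LoopInv_keys_seen hInv] at hm
    rw [(PySem.Dict.contains_iff_mem_keys seen (canon r4)).mpr hm] at hc
    cases hc
  have hload : loadB h (gridOf r4 C w h) = (r4.map (fun p : Int × Int => h - p.1)).sum :=
    load_gridOf r4 C w h h0 hg4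
  refine ⟨?_, ?_, ?_, ?_, ?_⟩
  · intro r hr
    rcases List.mem_append.mp hr with hr | hr
    · exact hInv.1 r hr
    · rw [List.mem_singleton.mp hr]; exact hg4
  · rw [PySem.Dict.items_insert_of_not_contains seen _ hc, hInv.2.1, List.map_append]
    rw [List.zip_append (by rw [List.length_map, hInv.2.2.2.1])]
    rw [hload]
    rfl
  · rw [PySem.Dict.items_insert_of_not_contains index _ hcB, hInv.2.2.1, List.map_append]
    rw [List.zipIdx_append, List.map_append]
    congr 1
    simp only [List.map_cons, List.map_nil, List.zipIdx_cons, List.zipIdx_nil]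
    rw [PySem.List.len_eq, List.length_map, hInv.2.2.2.1]
    simp
  · simp [hInv.2.2.2.1]
  · rw [List.map_append]
    simp only [List.map_cons, List.map_nil]
    rw [List.nodup_append]
    exact ⟨hInv.2.2.2.2, List.nodup_singleton _, by simpa using hnotmem⟩

theorem loop_corr (C : PySem.Set (Int × Int)) (w h : Int) (h0 : 0 ≤ h) :
    ∀ (fuel : Nat) (r : PySem.Set (Int × Int)) (R : List (PySem.Set (Int × Int)))
      (seen : PySem.Dict (List (Int × Int)) Int)
      (index : PySem.Dict (List (List Char)) Int) (loads : List Int) (sA : List (Int × Int)),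
      GoodR C w h r → LoopInv C w h R seen index loads →
      ∃ (RF : List (PySem.Set (Int × Int))) (rF : PySem.Set (Int × Int)),
        LoopInv C w h RF (loopA C w h fuel r seen sA).1
          (loopB w h fuel (gridOf r C w h) index loads).2.1
          (loopB w h fuel (gridOf r C w h) index loads).2.2 ∧
        GoodR C w h rF ∧
        ((fuel = 0 ∧ loopA C w h fuel r seen sA = (seen, sA) ∧
            loopB w h fuel (gridOf r C w h) index loads = (gridOf r C w h, index, loads)) ∨
         ((loopA C w h fuel r seen sA).2 = canon rF ∧
          (loopB w h fuel (gridOf r C w h) index loads).1 = gridOf rF C w h ∧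
          canon rF ∈ PySem.Dict.keys (loopA C w h fuel r seen sA).1)) := by
  intro fuel
  induction fuel with
  | zero =>
    intro r R seen index loads sA hgr hInv
    exact ⟨R, r, hInv, hgr, Or.inl ⟨rfl, rfl, rfl⟩⟩
  | succ fuel ih =>
    intro r R seen index loads sA hgr hInv
    have hRC : ∀ p ∈ r, p ∉ C := fun p hp => (hgr.2 p hp).2.2.2.2
    have hg4 : GoodR C w h (cycleA C w h r) := cycleA_good r C w h hgr
    have hspin : spinB w h (gridOf r C w h) = gridOf (cycleA C w h r) C w h :=
      spin_gridOf r C w h hRC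
    have hA : loopA C w h (fuel + 1) r seen sA
        = if (PySem.Dict.contains seen (canon (cycleA C w h r))) = true
          then (seen, canon (cycleA C w h r))
          else loopA C w h fuel (cycleA C w h r)
            (PySem.Dict.insert seen (canon (cycleA C w h r))
              (((cycleA C w h r).map (fun p => h - p.1)).sum))
            (canon (cycleA C w h r)) := rfl
    have hB : loopB w h (fuel + 1) (gridOf r C w h) index loads
        = if (PySem.Dict.contains index (gridOf (cycleA C w h r) C w h)) = true
          then (gridOf (cycleA C w h r) C w h, index, loads)
          else loopB w h fuel (gridOf (cycleA C w h r) C w h)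
            (PySem.Dict.insert index (gridOf (cycleA C w h r) C w h) (PySem.List.len loads))
            (loads ++ [loadB h (gridOf (cycleA C w h r) C w h)]) := by
      show (let g' := spinB w h (gridOf r C w h);
        if (PySem.Dict.contains index g') = true then (g', index, loads)
        else loopB w h fuel g' (PySem.Dict.insert index g' (PySem.List.len loads))
          (loads ++ [loadB h g'])) = _
      rw [hspin]
    rw [hA, hB, contains_equiv hInv _ hg4]
    by_cases hcont : PySem.Dict.contains seen (canon (cycleA C w h r)) = true
    · rw [if_pos hcont, if_pos hcont]
      exact ⟨R, cycleA C w h r, hInv, hg4,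
        Or.inr ⟨rfl, rfl, (PySem.Dict.contains_iff_mem_keys _ _).mp hcont⟩⟩
    · have hcf : PySem.Dict.contains seen (canon (cycleA C w h r)) = false := by
        cases hcc : PySem.Dict.contains seen (canon (cycleA C w h r))
        · rfl
        · exact absurd hcc hcont
      rw [if_neg hcont, if_neg hcont]
      obtain ⟨RF, rF, hInvF, hgF, hdisj⟩ := ih (cycleA C w h r) (R ++ [cycleA C w h r]) _ _ _
        (canon (cycleA C w h r)) hg4 (LoopInv_insert h0 hInv _ hg4 hcf)
      rcases hdisj with ⟨hf0, hAe, hBe⟩ | ⟨hA2, hB1, hmem⟩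
      · refine ⟨RF, cycleA C w h r, hInvF, hg4, Or.inr ?_⟩
        rw [hAe, hBe]
        exact ⟨rfl, rfl, (PySem.Dict.mem_keys_insert _ _ _ _).mpr (Or.inl rfl)⟩
      · exact ⟨RF, rF, hInvF, hgF, Or.inr ⟨hA2, hB1, hmem⟩⟩

theorem offsetScanA_eq (state : List (Int × Int)) (keys : List (List (Int × Int)))
    (hmem : state ∈ keys) :
    ∀ i : Int, offsetScanA state i keys = i + (List.idxOf state keys : Nat) := by
  induction keys with
  | nil => cases hmem
  | cons k ks ih =>
    intro i
    simp only [offsetScanA, List.idxOf_cons]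
    by_cases hk : (k == state) = true
    · rw [if_pos hk, hk]
      simp
    · have hkf : (k == state) = false := by
        cases hkk : k == state
        · rfl
        · exact absurd hkk hk
      rw [if_neg hk, hkf]
      have hmem' : state ∈ ks := by
        rcases List.mem_cons.mp hmem with h' | h'
        · exact absurd (beq_iff_eq.mpr h'.symm) hk
        · exact h'
      rw [ih hmem']
      simp only [cond_false]
      push_cast
      ring

theorem get?_zipIdx {κ : Type} [BEq κ] [LawfulBEq κ] (keys : List κ) (k : κ) (hmem : k ∈ keys) :
    ∀ n : Nat, (PySem.Dict.mk ((keys.zipIdx n).map (fun p => (p.1, ((p.2 : Nat) : Int))))).get? k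
      = some ((n : Int) + (List.idxOf k keys : Nat)) := by
  induction keys with
  | nil => cases hmem
  | cons x ks ih =>
    intro n
    rw [List.zipIdx_cons, List.map_cons, PySem.Dict.get?_mk_cons, List.idxOf_cons]
    by_cases hk : (x == k) = true
    · rw [if_pos hk, hk]
      simp
    · have hkf : (x == k) = false := by
        cases hkk : x == k
        · rfl
        · exact absurd hkk hk
      rw [if_neg hk, hkf]
      have hmem' : k ∈ ks := by
        rcases List.mem_cons.mp hmem with h' | h'
        · exact absurd (beq_iff_eq.mpr h'.symm) hk
        · exact h'
      rw [ih hmem' (n + 1)]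
      congr 1
      simp only [cond_false]
      push_cast
      ring

theorem idxOf_transfer (C : PySem.Set (Int × Int)) (w h : Int)
    (R : List (PySem.Set (Int × Int))) (rF : PySem.Set (Int × Int))
    (hall : ∀ r ∈ R, GoodR C w h r) (hgF : GoodR C w h rF) :
    List.idxOf (canon rF) (R.map canon)
      = List.idxOf (gridOf rF C w h) (R.map (fun r => gridOf r C w h)) := by
  induction R with
  | nil => rfl
  | cons r R' ih =>
    simp only [List.map_cons, List.idxOf_cons]
    have hiff : (canon r == canon rF) = (gridOf r C w h == gridOf rF C w h) := by
      by_cases he : canon r = canon rF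
      · rw [beq_iff_eq.mpr he,
          beq_iff_eq.mpr ((grid_canon_iff r rF (hall r List.mem_cons_self) hgF).mpr he)]
      · have h1 : (canon r == canon rF) = false := beq_eq_false_iff_ne.mpr he
        have h2 : (gridOf r C w h == gridOf rF C w h) = false := beq_eq_false_iff_ne.mpr
          (fun hcontr => he ((grid_canon_iff r rF (hall r List.mem_cons_self) hgF).mp hcontr))
        rw [h1, h2]
    rw [← hiff]
    cases hb : (canon r == canon rF)
    · simp only [cond_false]
      rw [ih (fun r' hr' => hall r' (List.mem_cons_of_mem _ hr'))]
    · rfl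

theorem part2_eq (data : String) (count : Int) (hcount : 1 ≤ count)
    (hlines : PySem.Str.splitlines data ≠ [])
    (hobeyond : ∀ line ∈ PySem.Str.splitlines data,
      'O' ∉ line.toList.drop ((PySem.Str.splitlines data).headI.toList.length)) :
    part2 data count = part2_alt data count := by
  obtain ⟨line0, rest, hcons⟩ : ∃ a t, PySem.Str.splitlines data = a :: t := by
    cases hsp : PySem.Str.splitlines data with
    | nil => exact absurd hsp hlines
    | cons a t => exact ⟨a, t, rfl⟩
  have hwidth : PySem.Str.len ((PySem.List.pyGet? (PySem.Str.splitlines data) 0).getD "")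
      = (((PySem.Str.splitlines data).headI.toList.length : Nat) : Int) := by
    rw [hcons, PySem.List.pyGet?_zero_cons]
    simp [PySem.Str.len_eq]
  simp only [part2, part2_alt]
  rw [hwidth, PySem.List.len_eq]
  rw [gridInit_eq data hlines hobeyond]
  set W : Int := (((PySem.Str.splitlines data).headI.toList.length : Nat) : Int) with hW
  set H : Int := (((PySem.Str.splitlines data).length : Nat) : Int) with hH
  have hgr0 : GoodR (parseA data).2 W H (parseA data).1 := parse_good data hlines hobeyond
  have hInv0 : LoopInv (parseA data).2 W H [] PySem.Dict.empty PySem.Dict.empty [] :=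
    ⟨(by intro r hr; cases hr), rfl, rfl, rfl, List.nodup_nil⟩
  obtain ⟨RF, rF, hInvF, hgF, hdisj⟩ := loop_corr (parseA data).2 W H (by positivity)
    count.toNat (parseA data).1 [] PySem.Dict.empty PySem.Dict.empty [] [] hgr0 hInv0
  set AR := loopA (parseA data).2 W H count.toNat (parseA data).1 PySem.Dict.empty [] with hAR
  set BR := loopB W H count.toNat (gridOf (parseA data).1 (parseA data).2 W H)
    PySem.Dict.empty [] with hBR
  have hfuel : count.toNat ≠ 0 := by omega
  rcases hdisj with ⟨h0', _, _⟩ | ⟨hA2, hB1, hmem⟩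
  · exact absurd h0' hfuel
  have hkeysS : PySem.Dict.keys AR.1 = RF.map canon := LoopInv_keys_seen hInvF
  have hmemC : canon rF ∈ RF.map canon := by rw [← hkeysS]; exact hmem
  have hmemG : gridOf rF (parseA data).2 W H ∈ RF.map (fun r => gridOf r (parseA data).2 W H) := by
    rcases List.mem_map.mp hmemC with ⟨r, hr, he⟩
    exact List.mem_map.mpr ⟨r, hr, (grid_canon_iff r rF (hInvF.1 r hr) hgF).mpr he⟩
  have hvals : PySem.Dict.values AR.1 = BR.2.2 := by
    show (PySem.Dict.items AR.1).map Prod.snd = _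
    rw [hInvF.2.1]
    exact List.map_snd_zip (by rw [List.length_map, hInvF.2.2.2.1])
  have hlens : (RF.map canon).length = BR.2.2.length := by
    rw [List.length_map, hInvF.2.2.2.1]
  have hsize : PySem.Dict.size AR.1 = PySem.List.len BR.2.2 := by
    show ((PySem.Dict.items AR.1).length : Int) = _
    rw [hInvF.2.1, PySem.List.len_eq, List.length_zip, List.length_map, hInvF.2.2.2.1]
    simp
  have hoffA : offsetScanA AR.2 0 (PySem.Dict.keys AR.1)
      = ((List.idxOf (canon rF) (RF.map canon) : Nat) : Int) := by
    rw [hA2, hkeysS, offsetScanA_eq _ _ hmemC 0, zero_add]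
  have hBdict : BR.2.1 = PySem.Dict.mk
      ((RF.map (fun r => gridOf r (parseA data).2 W H)).zipIdx.map
        (fun p => (p.1, ((p.2 : Nat) : Int)))) := PySem.Dict.ext hInvF.2.2.1
  have hoffB : (PySem.Dict.get? BR.2.1 BR.1).getD 0
      = ((List.idxOf (gridOf rF (parseA data).2 W H)
          (RF.map (fun r => gridOf r (parseA data).2 W H)) : Nat) : Int) := by
    rw [hB1, hBdict, get?_zipIdx _ _ hmemG 0]
    simp
  rw [hoffA, hoffB, hvals, hsize, idxOf_transfer (parseA data).2 W H RF rF hInvF.1 hgF]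

-- ===== VERDICT (by name: the statement is the Claim_ definition above) =====
theorem part2_spec : Claim_equal_part2 := by
  intro data count _ hpre
  show part2 data count = part2_alt data count
  exact part2_eq data count hpre.1 hpre.2.1 hpre.2.2
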